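-- pv_equiv track=rewrite | github.com/Chris91ss/UBB-FMI-Computer_Science | First year/Second Semester/Graphs/Practice/Problems/2023_sample_no2.py | find_number_of_min_cost_paths
-- ===== SOURCE A (Python) =====
-- from collections import defaultdict, deque
--
-- def find_number_of_min_cost_paths(graph, costs, s, t):
--     # Step 1: Perform topological sorting
--     def topological_sort():
--         in_degree = {u: 0 for u in graph}
--         for u in graph:
--             for v in graph[u]:
--                 in_degree[v] += 1
--         queue = deque(u for u in graph if in_degree[u] == 0)
--         topo_order = []
--         while queue:
--             u = queue.popleft()
--             topo_order.append(u)
--             for v in graph[u]: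
--                 in_degree[v] -= 1
--                 if in_degree[v] == 0:
--                     queue.append(v)
--         return topo_order
--
--     # Step 2: Initialize min_cost and count
--     min_cost = {u: float('inf') for u in graph}
--     min_cost[s] = 0
--     count = {u: 0 for u in graph}
--     count[s] = 1
--
--     # Step 3: Process vertices in topological order
--     topo_order = topological_sort()
--     for u in topo_order:
--         if min_cost[u] != float('inf'):  # Only proceed if u is reachable
--             for v in graph[u]:
--                 edge_cost = costs[(u, v)]
--                 if min_cost[v] > min_cost[u] + edge_cost:
--                     min_cost[v] = min_cost[u] + edge_cost
--                     count[v] = count[u]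
--                 elif min_cost[v] == min_cost[u] + edge_cost:
--                     count[v] += count[u]
--
--     return count[t] if min_cost[t] != float('inf') else 0
-- ===== SOURCE B (Python) =====
-- def find_number_of_min_cost_paths(graph, costs, s, t):
--     # Fixpoint (Jacobi) iteration instead of a topological sort: recompute every
--     # vertex's (best cost, count of best paths) from its predecessors until stable
--     # (at most len(graph) rounds suffice on a DAG).
--     INF = float('inf')
--     preds = {v: [] for v in graph}
--     for u in graph:
--         for v in graph[u]:
--             preds[v].append(u)
--     state = {v: (INF, 0) for v in graph}
--     state[s] = (0, 1)
--     for _ in range(len(graph)):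
--         new = {}
--         for v in state:
--             if v == s:
--                 new[v] = (0, 1)
--             else:
--                 best, cnt = INF, 0
--                 for u in preds.get(v, []):
--                     du, cu = state[u]
--                     if du != INF:
--                         cand = du + costs[(u, v)]
--                         if cand < best:
--                             best, cnt = cand, cu
--                         elif cand == best:
--                             cnt += cu
--                 new[v] = (best, cnt)
--         if new == state:
--             break
--         state = new
--     best, cnt = state[t]
--     return cnt if best != INF else 0
-- ===== Notes on version B (the rewrite author's own statement) =====
-- stated objective: alternative
-- what changed: Replaces Kahn's BFS topological sort followed by a forward edge-relaxation sweep with a topological-sort-free Jacobi fixpoint iteration that repeatedly recomputes every vertex's (best cost, number of best paths) from its predecessor lists until the state stabilises.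
-- outside the precondition, e.g. on find_number_of_min_cost_paths({0: [1], 1: [1]}, {(0, 1): 0, (1, 1): 0}, 0, 1): A returns 1, B returns 2
import Mathlib
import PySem

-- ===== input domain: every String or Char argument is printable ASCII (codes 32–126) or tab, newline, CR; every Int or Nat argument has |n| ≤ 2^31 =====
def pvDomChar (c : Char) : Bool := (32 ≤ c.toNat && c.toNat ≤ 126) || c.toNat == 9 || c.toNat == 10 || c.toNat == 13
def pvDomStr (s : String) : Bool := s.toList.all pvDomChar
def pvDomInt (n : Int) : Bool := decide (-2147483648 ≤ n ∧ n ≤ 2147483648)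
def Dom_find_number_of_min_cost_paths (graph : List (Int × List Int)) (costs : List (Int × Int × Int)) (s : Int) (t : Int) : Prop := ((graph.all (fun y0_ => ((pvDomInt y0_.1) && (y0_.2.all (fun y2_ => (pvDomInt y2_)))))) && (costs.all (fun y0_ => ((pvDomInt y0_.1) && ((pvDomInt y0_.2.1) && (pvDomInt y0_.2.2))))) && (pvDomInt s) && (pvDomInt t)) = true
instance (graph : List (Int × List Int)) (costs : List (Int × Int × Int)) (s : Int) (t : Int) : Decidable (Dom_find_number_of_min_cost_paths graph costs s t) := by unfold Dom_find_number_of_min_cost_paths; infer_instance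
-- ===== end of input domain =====

-- B replaces A's Kahn topological sort + forward relaxation sweep by a Jacobi fixpoint
-- iteration pulling each vertex's (best cost, count) from its predecessors until stable
-- (objective: alternative decomposition, same exact results on the stated precondition).

-- shared helpers: the two Python dict arguments as PySem dicts
def pvG (graph : List (Int × List Int)) : PySem.Dict Int (List Int) :=
  PySem.Dict.ofList graph
def pvC (costs : List (Int × Int × Int)) : PySem.Dict (Int × Int) Int :=
  PySem.Dict.ofList (costs.map (fun x => ((x.1, x.2.1), x.2.2)))
def pvAdj (g : PySem.Dict Int (List Int)) (u : Int) : List Int := g.getD u []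

-- ===== PORT A =====
-- float('inf') is modelled by `none : Option Int` (the only float values A manipulates are
-- the literal inf and exact ints); comparisons are hand-ported exactly below.
-- `a > b` on min-cost values with none = +inf
def pvOptGt : Option Int → Option Int → Bool
  | none, none => false
  | none, some _ => true
  | some _, none => false
  | some a, some b => a > b

-- body of A's inner `for v in graph[u]` loop (one relaxation step)
def pvRelaxA (cD : PySem.Dict (Int × Int) Int) (u : Int)
    (st : PySem.Dict Int (Option Int) × PySem.Dict Int Int) (v : Int) :
    PySem.Dict Int (Option Int) × PySem.Dict Int Int :=
  let ec := cD.getD (u, v) 0      -- costs[(u,v)]; missing key = KeyError, excluded by Pre_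
  let cand := match st.1.getD u none with
    | none => none
    | some du => some (du + ec)
  if pvOptGt (st.1.getD v none) cand then
    (st.1.insert v cand, st.2.insert v (st.2.getD u 0))
  else if st.1.getD v none = cand then
    (st.1, st.2.insert v (st.2.getD v 0 + st.2.getD u 0))
  else st

-- body of the inner `for v in graph[u]` loop of the Kahn while-loop
def pvKahnStep (p : List Int × PySem.Dict Int Int) (v : Int) : List Int × PySem.Dict Int Int :=
  let d := p.2.getD v 0 - 1       -- in_degree[v] -= 1; missing key = KeyError, excluded by Pre_
  ((if d = 0 then p.1 ++ [v] else p.1), p.2.insert v d)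

-- the `while queue:` loop; fuel = number of keys + 1 bounds the iterations (each one moves
-- a fresh vertex to topo_order), so the loop always terminates by its own `queue empty` test
def pvKahnLoop (g : PySem.Dict Int (List Int)) :
    Nat → List Int → List Int → PySem.Dict Int Int → List Int
  | 0, _, topo, _ => topo
  | _ + 1, [], topo, _ => topo
  | fuel + 1, u :: q, topo, deg =>
      let st := (pvAdj g u).foldl pvKahnStep (q, deg)
      pvKahnLoop g fuel st.1 (topo ++ [u]) st.2

def pvTopo (g : PySem.Dict Int (List Int)) : List Int :=
  let indeg := g.keys.foldl
    (fun d u => (pvAdj g u).foldl (fun d v => d.insert v (d.getD v 0 + 1)) d)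
    (g.keys.foldl (fun d u => d.insert u 0) PySem.Dict.empty)
  pvKahnLoop g (g.size + 1) (g.keys.filter (fun u => indeg.getD u 0 = 0)) [] indeg

def find_number_of_min_cost_paths (graph : List (Int × List Int)) (costs : List (Int × Int × Int)) (s : Int) (t : Int) : Int :=
  let g := pvG graph
  let cD := pvC costs
  let mc0 := (g.keys.foldl (fun d u => d.insert u (none : Option Int)) PySem.Dict.empty).insert s (some 0)
  let cnt0 := (g.keys.foldl (fun d u => d.insert u (0 : Int)) PySem.Dict.empty).insert s 1
  let fin := (pvTopo g).foldl
    (fun st u => if st.1.getD u none ≠ none then (pvAdj g u).foldl (pvRelaxA cD u) st else st)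
    (mc0, cnt0)
  if fin.1.getD t none ≠ none then fin.2.getD t 0 else 0   -- min_cost[t]/count[t]; t absent = KeyError, excluded by Pre_

-- ===== PORT B =====
-- predecessor lists: preds = {v: [] for v in graph}; then preds[v].append(u) per edge
-- (a missing key in preds[v] = KeyError, excluded by Pre_; ported as getD-insert)
def pvPreds (g : PySem.Dict Int (List Int)) : PySem.Dict Int (List Int) :=
  g.keys.foldl
    (fun d u => (pvAdj g u).foldl (fun d v => d.insert v (d.getD v [] ++ [u])) d)
    (g.keys.foldl (fun d v => d.insert v []) PySem.Dict.empty)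

-- body of B's inner `for u in preds.get(v, [])` loop
def pvScan (cD : PySem.Dict (Int × Int) Int) (stOld : PySem.Dict Int (Option Int × Int)) (v : Int)
    (bc : Option Int × Int) (u : Int) : Option Int × Int :=
  match stOld.getD u (none, 0) with
  | (none, _) => bc
  | (some du, cu) =>
      let cand := du + cD.getD (u, v) 0   -- costs[(u,v)]; missing key = KeyError, excluded by Pre_
      match bc.1 with
      | none => (some cand, cu)
      | some b => if cand < b then (some cand, cu) else if cand = b then (some b, bc.2 + cu) else bc

-- one round: new = {v: recomputed from preds} over the keys of state
def pvRound (pr : PySem.Dict Int (List Int)) (cD : PySem.Dict (Int × Int) Int) (s : Int)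
    (stOld : PySem.Dict Int (Option Int × Int)) : PySem.Dict Int (Option Int × Int) :=
  stOld.keys.foldl
    (fun nd v => nd.insert v
      (if v = s then ((some 0 : Option Int), (1 : Int))
       else (pr.getD v []).foldl (pvScan cD stOld v) (none, 0)))
    PySem.Dict.empty

-- `for _ in range(len(graph)): ... if new == state: break; state = new`
def pvRounds (pr : PySem.Dict Int (List Int)) (cD : PySem.Dict (Int × Int) Int) (s : Int) :
    Nat → PySem.Dict Int (Option Int × Int) → PySem.Dict Int (Option Int × Int)
  | 0, st => st
  | k + 1, st =>
      let new := pvRound pr cD s st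
      -- `new == state` on Python dicts; both have the same key order here, so
      -- it is equality of the underlying item lists
      if new = st then st else pvRounds pr cD s k new

def find_number_of_min_cost_paths_alt (graph : List (Int × List Int)) (costs : List (Int × Int × Int)) (s : Int) (t : Int) : Int :=
  let g := pvG graph
  let cD := pvC costs
  let pr := pvPreds g
  let st0 := (g.keys.foldl (fun d v => d.insert v ((none : Option Int), (0 : Int))) PySem.Dict.empty).insert s (some 0, 1)
  let fin := pvRounds pr cD s g.size st0
  let bc := fin.getD t ((none : Option Int), (0 : Int))    -- state[t]; t absent = KeyError, excluded by Pre_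
  if bc.1 ≠ none then bc.2 else 0

-- ===== PRECONDITION & SPEC =====
-- backward-closure machinery used to state acyclicity and s-reachability in closed form
def pvBclStep (g : PySem.Dict Int (List Int)) (S : List Int) : List Int :=
  S ++ g.keys.filter (fun u => decide (u ∉ S) && (pvAdj g u).any (fun v => decide (v ∈ S)))
def pvBcl (g : PySem.Dict Int (List Int)) (T : List Int) : List Int :=
  (pvBclStep g)^[g.keys.length + 1] T
def pvPredsOf (g : PySem.Dict Int (List Int)) (v : Int) : List Int :=
  g.keys.filter (fun u => decide (v ∈ pvAdj g u))
def pvAnc (g : PySem.Dict Int (List Int)) (v : Int) : List Int :=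
  pvBcl g (pvPredsOf g v)

-- no vertex on a directed cycle may reach any vertex that s reaches
def pvCycOK (g : PySem.Dict Int (List Int)) (s : Int) : Prop :=
  ∀ v ∈ g.keys, v ∈ pvAnc g v → ∀ w ∈ g.keys, s ∈ pvBcl g [w] → v ∉ pvBcl g [w]

-- Pre_ = exactly the inputs where the Python A returns, except that graphs with a directed
-- cycle whose vertices can reach the part of the graph reachable from s are also excluded: on
-- those A's Kahn sweep silently skips the cycle-tainted vertices while B's fixpoint iteration
-- keeps relaxing around the cycle, and neither value is specified for a DAG algorithm.
-- The four conjuncts: every edge target is a graph key (else A's `in_degree[v] += 1` raises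
-- KeyError); t is a key or equals s (else A's `min_cost[t]` raises KeyError); no vertex on a
-- directed cycle reaches an s-reachable vertex; every edge out of a vertex reachable from s
-- has a cost (else A's `costs[(u, v)]` raises KeyError).
def Pre_find_number_of_min_cost_paths (graph : List (Int × List Int)) (costs : List (Int × Int × Int)) (s : Int) (t : Int) : Prop :=
  (∀ u ∈ (pvG graph).keys, ∀ v ∈ pvAdj (pvG graph) u, v ∈ (pvG graph).keys) ∧
  (t ∈ (pvG graph).keys ∨ t = s) ∧
  pvCycOK (pvG graph) s ∧
  (∀ u ∈ (pvG graph).keys, s ∈ pvBcl (pvG graph) [u] →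
    ∀ v ∈ pvAdj (pvG graph) u, (pvC costs).contains (u, v) = true)
instance (graph : List (Int × List Int)) (costs : List (Int × Int × Int)) (s : Int) (t : Int) : Decidable (Pre_find_number_of_min_cost_paths graph costs s t) := by
  unfold Pre_find_number_of_min_cost_paths pvCycOK; infer_instance

def pvWitness_find_number_of_min_cost_paths : (List (Int × List Int)) × (List (Int × Int × Int)) × Int × Int :=
  ([(0, [1, 2]), (1, [2]), (2, [])], [(0, 1, 1), (0, 2, 2), (1, 2, 1)], 0, 2)

def Spec_find_number_of_min_cost_paths (graph : List (Int × List Int)) (costs : List (Int × Int × Int)) (s : Int) (t : Int) (out : Int) : Prop := out = find_number_of_min_cost_paths_alt graph costs s t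
instance (graph : List (Int × List Int)) (costs : List (Int × Int × Int)) (s : Int) (t : Int) (out : Int) : Decidable (Spec_find_number_of_min_cost_paths graph costs s t out) := by unfold Spec_find_number_of_min_cost_paths; infer_instance

-- ===== CLAIM (what is proved, stated in full; the proofs are below) =====
def Claim_equal_find_number_of_min_cost_paths : Prop := ∀ (graph : List (Int × List Int)) (costs : List (Int × Int × Int)) (s : Int) (t : Int), Dom_find_number_of_min_cost_paths graph costs s t → Pre_find_number_of_min_cost_paths graph costs s t → Spec_find_number_of_min_cost_paths graph costs s t (find_number_of_min_cost_paths graph costs s t)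

-- ===== LEMMAS AND PROOFS =====

theorem pvWitness_ok :
    Dom_find_number_of_min_cost_paths (pvWitness_find_number_of_min_cost_paths.1) (pvWitness_find_number_of_min_cost_paths.2.1) (pvWitness_find_number_of_min_cost_paths.2.2.1) (pvWitness_find_number_of_min_cost_paths.2.2.2) ∧
    Pre_find_number_of_min_cost_paths (pvWitness_find_number_of_min_cost_paths.1) (pvWitness_find_number_of_min_cost_paths.2.1) (pvWitness_find_number_of_min_cost_paths.2.2.1) (pvWitness_find_number_of_min_cost_paths.2.2.2) := by
  constructor <;> decide


-- ---------- generic helpers ----------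
theorem pvIter_of_fix {α : Type} (f : α → α) (x : α) (h : f x = x) : ∀ j, f^[j] x = x := by
  intro j; induction j with
  | zero => rfl
  | succ n ih => rw [Function.iterate_succ_apply, h, ih]

theorem pvLen_le {l a b : List Int} (hnd : l.Nodup) (hmem : ∀ x ∈ l, x ∈ a ∨ x ∈ b) :
    l.length ≤ a.length + b.length := by
  have h1 : l.toFinset ⊆ a.toFinset ∪ b.toFinset := by
    intro x hx
    simp only [List.mem_toFinset, Finset.mem_union] at *
    exact hmem x hx
  have h2 := Finset.card_le_card h1
  have h3 := Finset.card_union_le a.toFinset b.toFinset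
  have h4 := List.toFinset_card_le a
  have h5 := List.toFinset_card_le b
  rw [List.toFinset_card_of_nodup hnd] at h2
  omega

-- ---------- backward closure lemmas ----------
theorem mem_pvBclStep {g : PySem.Dict Int (List Int)} {S : List Int} {x : Int} :
    x ∈ pvBclStep g S ↔ x ∈ S ∨ (x ∈ g.keys ∧ ∃ v ∈ pvAdj g x, v ∈ S) := by
  simp [pvBclStep, List.mem_filter, List.any_eq_true]
  tauto

theorem pvBclStep_subset {g : PySem.Dict Int (List Int)} {S : List Int} : S ⊆ pvBclStep g S := by
  intro x hx; exact mem_pvBclStep.mpr (Or.inl hx)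

theorem pvBclStep_mono {g : PySem.Dict Int (List Int)} {S T : List Int} (h : S ⊆ T) :
    pvBclStep g S ⊆ pvBclStep g T := by
  intro x hx
  rcases mem_pvBclStep.mp hx with h1 | ⟨h1, v, h2, h3⟩
  · exact pvBclStep_subset (h h1)
  · exact mem_pvBclStep.mpr (Or.inr ⟨h1, v, h2, h h3⟩)

theorem pvIter_mem {g : PySem.Dict Int (List Int)} {S : List Int} :
    ∀ k, ∀ x ∈ (pvBclStep g)^[k] S, x ∈ S ∨ x ∈ g.keys := by
  intro k; induction k with
  | zero => intro x hx; exact Or.inl hx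
  | succ n ih =>
      intro x hx
      rw [Function.iterate_succ_apply'] at hx
      rcases mem_pvBclStep.mp hx with h1 | ⟨h1, _⟩
      · exact ih x h1
      · exact Or.inr h1

theorem pvIter_nodup {g : PySem.Dict Int (List Int)} {S : List Int}
    (hk : g.keys.Nodup) (hS : S.Nodup) : ∀ k, ((pvBclStep g)^[k] S).Nodup := by
  intro k; induction k with
  | zero => exact hS
  | succ n ih =>
      rw [Function.iterate_succ_apply']
      refine List.Nodup.append ih (hk.filter _) ?_
      intro x hx hy
      have := List.of_mem_filter hy
      simp only [Bool.and_eq_true, decide_eq_true_eq] at this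
      exact this.1 hx

theorem pvIter_subset {g : PySem.Dict Int (List Int)} {S : List Int} :
    ∀ k, S ⊆ (pvBclStep g)^[k] S := by
  intro k; induction k with
  | zero => exact fun x hx => hx
  | succ n ih =>
      rw [Function.iterate_succ_apply']
      exact fun x hx => pvBclStep_subset (ih hx)

theorem pvBcl_seed {g : PySem.Dict Int (List Int)} {S : List Int} : S ⊆ pvBcl g S :=
  pvIter_subset _

theorem pvBcl_fixed {g : PySem.Dict Int (List Int)} {S : List Int}
    (hk : g.keys.Nodup) (hS : S.Nodup) : pvBclStep g (pvBcl g S) = pvBcl g S := by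
  set f := pvBclStep g with hf
  set L := g.keys.length with hL
  have hexists : ∃ k, k ≤ L ∧ f^[k] S = f^[k + 1] S := by
    by_contra hcon
    push_neg at hcon
    have hgrow : ∀ k, k ≤ L + 1 → S.length + k ≤ (f^[k] S).length := by
      intro k; induction k with
      | zero => simp
      | succ n ih =>
          intro hn
          have h1 := ih (by omega)
          have hne := hcon n (by omega)
          have hstep : (f^[n + 1] S) = (f^[n] S) ++
              (g.keys.filter (fun u => decide (u ∉ (f^[n] S)) && (pvAdj g u).any (fun v => decide (v ∈ (f^[n] S))))) := by
            rw [Function.iterate_succ_apply']; rfl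
          have hflt : (g.keys.filter (fun u => decide (u ∉ (f^[n] S)) && (pvAdj g u).any (fun v => decide (v ∈ (f^[n] S))))) ≠ [] := by
            intro hnil
            apply hne
            rw [hstep, hnil, List.append_nil]
          have : 1 ≤ (g.keys.filter (fun u => decide (u ∉ (f^[n] S)) && (pvAdj g u).any (fun v => decide (v ∈ (f^[n] S))))).length := by
            cases hl : (g.keys.filter (fun u => decide (u ∉ (f^[n] S)) && (pvAdj g u).any (fun v => decide (v ∈ (f^[n] S))))) with
            | nil => exact absurd hl hflt
            | cons a l => simp
          have hlen : (f^[n + 1] S).length = (f^[n] S).length +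
              (g.keys.filter (fun u => decide (u ∉ (f^[n] S)) && (pvAdj g u).any (fun v => decide (v ∈ (f^[n] S))))).length := by
            rw [hstep, List.length_append]
          omega
    have h1 := hgrow (L + 1) (le_refl _)
    have h2 : (f^[L + 1] S).length ≤ S.length + L :=
      pvLen_le (pvIter_nodup hk hS _) (pvIter_mem _)
    omega
  obtain ⟨k, hkL, hfix⟩ := hexists
  have hfx : f (f^[k] S) = f^[k] S := by
    have hx := Function.iterate_succ_apply' f k S
    rw [← hx]; exact hfix.symm
  have hall : ∀ j, f^[j] (f^[k] S) = f^[k] S := pvIter_of_fix f _ hfx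
  have hbcl : pvBcl g S = f^[k] S := by
    have : f^[L + 1] S = f^[(L + 1 - k) + k] S := by congr 1; omega
    rw [pvBcl, ← hL, ← hf, this, Function.iterate_add_apply]
    exact hall _
  rw [hbcl]; exact hfx

theorem pvBcl_minimal {g : PySem.Dict Int (List Int)} {T F : List Int}
    (hF : pvBclStep g F = F) (hTF : T ⊆ F) : pvBcl g T ⊆ F := by
  have : ∀ k, (pvBclStep g)^[k] T ⊆ F := by
    intro k; induction k with
    | zero => exact hTF
    | succ n ih =>
        rw [Function.iterate_succ_apply']
        intro x hx
        have := pvBclStep_mono ih hx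
        rwa [hF] at this
  exact this _

theorem pvBcl_closed {g : PySem.Dict Int (List Int)} {S : List Int} {u v : Int}
    (hk : g.keys.Nodup) (hS : S.Nodup) (hu : u ∈ g.keys) (hv : v ∈ pvAdj g u)
    (hvb : v ∈ pvBcl g S) : u ∈ pvBcl g S := by
  have : u ∈ pvBclStep g (pvBcl g S) := mem_pvBclStep.mpr (Or.inr ⟨hu, v, hv, hvb⟩)
  rwa [pvBcl_fixed hk hS] at this

theorem pvBcl_mono {g : PySem.Dict Int (List Int)} {T T' : List Int}
    (hk : g.keys.Nodup) (hT' : T'.Nodup) (h : T ⊆ T') : pvBcl g T ⊆ pvBcl g T' :=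
  pvBcl_minimal (pvBcl_fixed hk hT') (fun x hx => pvBcl_seed (h hx))

theorem pvBcl_nodup {g : PySem.Dict Int (List Int)} {S : List Int}
    (hk : g.keys.Nodup) (hS : S.Nodup) : (pvBcl g S).Nodup := pvIter_nodup hk hS _

-- ---------- ancestor-set measure ----------
theorem mem_pvPredsOf {g : PySem.Dict Int (List Int)} {u v : Int} :
    u ∈ pvPredsOf g v ↔ u ∈ g.keys ∧ v ∈ pvAdj g u := by
  simp [pvPredsOf, List.mem_filter]

theorem pvPredsOf_nodup {g : PySem.Dict Int (List Int)} (hk : g.keys.Nodup) (v : Int) :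
    (pvPredsOf g v).Nodup := hk.filter _

theorem pvAnc_nodup {g : PySem.Dict Int (List Int)} (hk : g.keys.Nodup) (v : Int) :
    (pvAnc g v).Nodup := pvBcl_nodup hk (pvPredsOf_nodup hk v)

theorem pvAnc_subset_keys {g : PySem.Dict Int (List Int)} {v : Int} :
    ∀ x ∈ pvAnc g v, x ∈ g.keys := by
  intro x hx
  rcases pvIter_mem _ x hx with h | h
  · exact (mem_pvPredsOf.mp h).1
  · exact h

theorem pvAnc_lt {g : PySem.Dict Int (List Int)} {u v : Int}
    (hk : g.keys.Nodup) (hnotu : u ∉ pvAnc g u)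
    (hu : u ∈ g.keys) (hv : v ∈ pvAdj g u) :
    (pvAnc g u).length < (pvAnc g v).length := by
  have huv : u ∈ pvAnc g v := pvBcl_seed (mem_pvPredsOf.mpr ⟨hu, hv⟩)
  have hsub : pvAnc g u ⊆ pvAnc g v := by
    apply pvBcl_minimal (pvBcl_fixed hk (pvPredsOf_nodup hk v))
    intro w hw
    obtain ⟨hwk, hwu⟩ := mem_pvPredsOf.mp hw
    exact pvBcl_closed hk (pvPredsOf_nodup hk v) hwk hwu huv
  have hnot : u ∉ pvAnc g u := hnotu
  have hfs : (pvAnc g u).toFinset ⊂ (pvAnc g v).toFinset := by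
    constructor
    · intro x hx
      simp only [List.mem_toFinset] at *
      exact hsub hx
    · intro hcon
      have := hcon (List.mem_toFinset.mpr huv)
      exact hnot (List.mem_toFinset.mp this)
  have := Finset.card_lt_card hfs
  rwa [List.toFinset_card_of_nodup (pvAnc_nodup hk u),
       List.toFinset_card_of_nodup (pvAnc_nodup hk v)] at this

theorem pvAnc_le_keys {g : PySem.Dict Int (List Int)} (hk : g.keys.Nodup) (v : Int) :
    (pvAnc g v).length ≤ g.keys.length := by
  have h1 : (pvAnc g v).toFinset ⊆ g.keys.toFinset := by
    intro x hx
    simp only [List.mem_toFinset] at *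
    exact pvAnc_subset_keys x hx
  have h2 := Finset.card_le_card h1
  have h3 := List.toFinset_card_le g.keys
  rw [List.toFinset_card_of_nodup (pvAnc_nodup hk v)] at h2
  omega

theorem pvAnc_lt_keys {g : PySem.Dict Int (List Int)} {u : Int}
    (hk : g.keys.Nodup) (hnotu : u ∉ pvAnc g u) (hu : u ∈ g.keys) :
    (pvAnc g u).length < g.keys.length := by
  have hfs : (pvAnc g u).toFinset ⊂ g.keys.toFinset := by
    constructor
    · intro x hx
      simp only [List.mem_toFinset] at *
      exact pvAnc_subset_keys x hx
    · intro hcon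
      have := hcon (List.mem_toFinset.mpr hu)
      exact hnotu (List.mem_toFinset.mp this)
  have := Finset.card_lt_card hfs
  rw [List.toFinset_card_of_nodup (pvAnc_nodup hk u), List.toFinset_card_of_nodup hk] at this
  exact this



-- ---------- predecessor multiset list and the pull DP ----------
def pvPL (g : PySem.Dict Int (List Int)) (v : Int) : List Int :=
  g.keys.flatMap (fun u => ((pvAdj g u).filter (fun w => w == v)).map (fun _ => u))

def pvMerge (a b : Option Int × Int) : Option Int × Int :=
  match a, b with
  | (none, c1), (none, c2) => (none, c1 + c2)
  | (none, _), (some d, c2) => (some d, c2)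
  | (some d, c1), (none, _) => (some d, c1)
  | (some d1, c1), (some d2, c2) =>
      if d1 < d2 then (some d1, c1) else if d2 < d1 then (some d2, c2) else (some d1, c1 + c2)

def pvCand (cD : PySem.Dict (Int × Int) Int) (v : Int) (r : Option Int × Int) (u : Int) :
    Option Int × Int :=
  match r with
  | (none, _) => (none, 0)
  | (some du, cu) => (some (du + cD.getD (u, v) 0), cu)

def pvStep (cD : PySem.Dict (Int × Int) Int) (sol : Int → Option Int × Int) (v : Int)
    (bc : Option Int × Int) (u : Int) : Option Int × Int :=
  pvMerge bc (pvCand cD v (sol u) u)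

def pvSolF (g : PySem.Dict Int (List Int)) (cD : PySem.Dict (Int × Int) Int) (s : Int) :
    Nat → Int → Option Int × Int
  | 0, _ => (none, 0)
  | k + 1, v =>
      if v = s then (some 0, 1)
      else (pvPL g v).foldl (pvStep cD (pvSolF g cD s k) v) (none, 0)

def pvSOL (g : PySem.Dict Int (List Int)) (cD : PySem.Dict (Int × Int) Int) (s v : Int) :
    Option Int × Int := pvSolF g cD s (g.keys.length + 1) v

theorem mem_pvPL {g : PySem.Dict Int (List Int)} {u v : Int} :
    u ∈ pvPL g v ↔ u ∈ g.keys ∧ v ∈ pvAdj g u := by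
  simp only [pvPL, List.mem_flatMap, List.mem_map, List.mem_filter, beq_iff_eq]
  constructor
  · rintro ⟨a, ha, ⟨w, ⟨hw, rfl⟩, rfl⟩⟩
    exact ⟨ha, hw⟩
  · rintro ⟨ha, hv⟩
    exact ⟨u, ha, ⟨v, ⟨hv, rfl⟩, rfl⟩⟩

theorem pvPL_nil_of_not_key {g : PySem.Dict Int (List Int)} {v : Int}
    (hclo : ∀ u ∈ g.keys, ∀ w ∈ pvAdj g u, w ∈ g.keys) (hv : v ∉ g.keys) : pvPL g v = [] := by
  rcases hl : pvPL g v with _ | ⟨a, l⟩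
  · rfl
  · exfalso
    have : a ∈ pvPL g v := by rw [hl]; exact List.mem_cons_self
    obtain ⟨ha, hav⟩ := mem_pvPL.mp this
    exact hv (hclo a ha v hav)

theorem pvMerge_none_right (a : Option Int × Int) : pvMerge a (none, 0) = a := by
  rcases a with ⟨_ | d, c⟩ <;> simp [pvMerge]

theorem pvMerge_comm (a b : Option Int × Int) : pvMerge a b = pvMerge b a := by
  rcases a with ⟨_ | d1, c1⟩ <;> rcases b with ⟨_ | d2, c2⟩ <;> simp [pvMerge]
  · omega
  · split_ifs <;> simp_all [Prod.ext_iff] <;> omega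

theorem pvMerge_assoc (a b c : Option Int × Int) :
    pvMerge (pvMerge a b) c = pvMerge a (pvMerge b c) := by
  rcases a with ⟨_ | d1, c1⟩ <;> rcases b with ⟨_ | d2, c2⟩ <;> rcases c with ⟨_ | d3, c3⟩ <;>
    simp only [pvMerge]
  all_goals repeat' (first | split_ifs | simp only [pvMerge])
  all_goals try simp only [Prod.mk.injEq, Option.some.injEq, true_and, and_true]
  all_goals first
    | rfl
    | omega
    | (constructor <;> omega)

theorem pvMerge_fst_none {a b : Option Int × Int} :
    (pvMerge a b).1 = none ↔ a.1 = none ∧ b.1 = none := by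
  rcases a with ⟨_ | d1, c1⟩ <;> rcases b with ⟨_ | d2, c2⟩ <;> simp [pvMerge] <;> split_ifs <;> simp

theorem pvCand_fst_none {cD : PySem.Dict (Int × Int) Int} {v : Int} {r : Option Int × Int} {u : Int} :
    (pvCand cD v r u).1 = none ↔ r.1 = none := by
  rcases r with ⟨_ | d, c⟩ <;> simp [pvCand]

theorem pvStep_rcomm (cD : PySem.Dict (Int × Int) Int) (sol : Int → Option Int × Int) (v : Int)
    (b : Option Int × Int) (x y : Int) :
    pvStep cD sol v (pvStep cD sol v b x) y = pvStep cD sol v (pvStep cD sol v b y) x := by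
  simp only [pvStep, pvMerge_assoc]
  rw [pvMerge_comm (pvCand cD v (sol x) x)]

theorem pvFold_perm (cD : PySem.Dict (Int × Int) Int) (sol : Int → Option Int × Int) (v : Int)
    {l1 l2 : List Int} (h : l1.Perm l2) (b : Option Int × Int) :
    l1.foldl (pvStep cD sol v) b = l2.foldl (pvStep cD sol v) b :=
  List.Perm.foldl_eq (rcomm := ⟨fun _ _ _ => pvStep_rcomm cD sol v _ _ _⟩) h b

theorem pvFold_id {cD : PySem.Dict (Int × Int) Int} {sol : Int → Option Int × Int} {v : Int}
    {l : List Int} (h : ∀ u ∈ l, pvCand cD v (sol u) u = (none, 0)) (b : Option Int × Int) :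
    l.foldl (pvStep cD sol v) b = b := by
  induction l generalizing b with
  | nil => rfl
  | cons a l ih =>
      simp only [List.foldl_cons]
      rw [show pvStep cD sol v b a = b by
            simp only [pvStep, h a List.mem_cons_self, pvMerge_none_right]]
      exact ih (fun u hu => h u (List.mem_cons_of_mem _ hu)) b

theorem pvFold_congr {cD : PySem.Dict (Int × Int) Int} {sol sol' : Int → Option Int × Int} {v : Int}
    {l : List Int} (h : ∀ u ∈ l, sol u = sol' u) (b : Option Int × Int) :
    l.foldl (pvStep cD sol v) b = l.foldl (pvStep cD sol' v) b := by
  induction l generalizing b with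
  | nil => rfl
  | cons a l ih =>
      simp only [List.foldl_cons, pvStep, h a List.mem_cons_self]
      exact ih (fun u hu => h u (List.mem_cons_of_mem _ hu)) _

theorem pvFold_finite {cD : PySem.Dict (Int × Int) Int} {sol : Int → Option Int × Int} {v : Int}
    {l : List Int} {b : Option Int × Int}
    (h : (l.foldl (pvStep cD sol v) b).1 ≠ none) :
    b.1 ≠ none ∨ ∃ u ∈ l, (sol u).1 ≠ none := by
  induction l generalizing b with
  | nil => exact Or.inl h
  | cons a l ih =>
      simp only [List.foldl_cons] at h
      rcases ih h with h1 | ⟨u, hu, h2⟩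
      · by_cases hb : b.1 = none
        · by_cases ha : (sol a).1 = none
          · exfalso
            apply h1
            simp only [pvStep, pvMerge_fst_none, pvCand_fst_none]
            exact ⟨hb, ha⟩
          · exact Or.inr ⟨a, List.mem_cons_self, ha⟩
        · exact Or.inl hb
      · exact Or.inr ⟨u, List.mem_cons_of_mem _ hu, h2⟩

theorem pvBcl_singleton_sub {g : PySem.Dict Int (List Int)} {p u : Int}
    (hk : g.keys.Nodup) (hp : p ∈ g.keys) (hadj : u ∈ pvAdj g p) :
    pvBcl g [p] ⊆ pvBcl g [u] := by
  have hpu : p ∈ pvBcl g [u] :=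
    pvBcl_closed hk (List.nodup_singleton u) hp hadj (pvBcl_seed List.mem_cons_self)
  apply pvBcl_minimal (pvBcl_fixed hk (List.nodup_singleton u))
  intro x hx
  have hxp : x = p := by simpa using hx
  exact hxp ▸ hpu

theorem pvSolF_finite_bcl {g : PySem.Dict Int (List Int)} {cD : PySem.Dict (Int × Int) Int} {s : Int}
    (hk : g.keys.Nodup) :
    ∀ k v, (pvSolF g cD s k v).1 ≠ none → s ∈ pvBcl g [v] := by
  intro k
  induction k with
  | zero => intro v hv; simp [pvSolF] at hv
  | succ n ih =>
      intro v hv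
      simp only [pvSolF] at hv
      split at hv
      · subst ‹v = s›
        exact pvBcl_seed List.mem_cons_self
      · rcases pvFold_finite hv with h1 | ⟨u, hu, h2⟩
        · simp at h1
        · obtain ⟨huk, hadj⟩ := mem_pvPL.mp hu
          exact pvBcl_singleton_sub hk huk hadj (ih u h2)

theorem pvUnreach_solF {g : PySem.Dict Int (List Int)} {cD : PySem.Dict (Int × Int) Int} {s u : Int}
    (hk : g.keys.Nodup) (hun : s ∉ pvBcl g [u]) :
    ∀ j, pvSolF g cD s j u = (none, 0) := by
  intro j
  induction j generalizing u with
  | zero => rfl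
  | succ n ih =>
      simp only [pvSolF]
      rw [if_neg (fun hus => hun (by rw [hus]; exact pvBcl_seed List.mem_cons_self))]
      apply pvFold_id
      intro p hp
      obtain ⟨hpk, hadj⟩ := mem_pvPL.mp hp
      by_cases hfin : (pvSolF g cD s n p).1 = none
      · rcases hv : pvSolF g cD s n p with ⟨o, c⟩
        rw [hv] at hfin
        simp only at hfin
        subst hfin
        rfl
      · exfalso
        exact hun (pvBcl_singleton_sub hk hpk hadj (pvSolF_finite_bcl hk n p hfin))

-- a cycle-free s-reachable vertex stays cycle-free (consequences of pvCycOK)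
theorem pvCycOK_notanc {g : PySem.Dict Int (List Int)} {s u : Int}
    (hC : pvCycOK g s) (hu : u ∈ g.keys) (hre : s ∈ pvBcl g [u]) : u ∉ pvAnc g u :=
  fun hin => hC u hu hin u hu hre (pvBcl_seed List.mem_cons_self)

theorem pvSolF_stab {g : PySem.Dict Int (List Int)} {cD : PySem.Dict (Int × Int) Int} {s : Int}
    (hk : g.keys.Nodup) (hC : pvCycOK g s) :
    ∀ k v, (pvAnc g v).length < k →
      pvSolF g cD s (k + 1) v = pvSolF g cD s k v := by
  intro k
  induction k with
  | zero => intro v hv; omega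
  | succ n ih =>
      intro v hv
      show pvSolF g cD s (n + 2) v = pvSolF g cD s (n + 1) v
      simp only [pvSolF]
      split
      · rfl
      · apply pvFold_congr
        intro u hu
        show pvSolF g cD s (n + 1) u = pvSolF g cD s n u
        obtain ⟨huk, hadj⟩ := mem_pvPL.mp hu
        by_cases hre : s ∈ pvBcl g [u]
        · have h1 : (pvAnc g u).length < (pvAnc g v).length :=
            pvAnc_lt hk (pvCycOK_notanc hC huk hre) huk hadj
          exact ih u (by omega)
        · rw [pvUnreach_solF hk hre (n + 1), pvUnreach_solF hk hre n]

theorem pvSolF_ge {g : PySem.Dict Int (List Int)} {cD : PySem.Dict (Int × Int) Int} {s : Int}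
    (hk : g.keys.Nodup) (hC : pvCycOK g s) {v : Int} :
    ∀ k, (pvAnc g v).length < k →
      pvSolF g cD s k v = pvSolF g cD s ((pvAnc g v).length + 1) v := by
  intro k
  induction k with
  | zero => intro hv; omega
  | succ n ih =>
      intro hv
      by_cases h : (pvAnc g v).length < n
      · rw [pvSolF_stab hk hC n v h]
        exact ih h
      · have : n = (pvAnc g v).length := by omega
        rw [this]

theorem pvSolF_eq_SOL {g : PySem.Dict Int (List Int)} {cD : PySem.Dict (Int × Int) Int} {s : Int}
    (hk : g.keys.Nodup) (hC : pvCycOK g s) {v : Int} {k : Nat}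
    (h : (pvAnc g v).length < k) : pvSolF g cD s k v = pvSOL g cD s v := by
  rw [pvSolF_ge hk hC k h, pvSOL,
      pvSolF_ge hk hC (g.keys.length + 1) (by have := pvAnc_le_keys hk v; omega)]

theorem pvSOL_unfold {g : PySem.Dict Int (List Int)} {cD : PySem.Dict (Int × Int) Int} {s : Int}
    (hk : g.keys.Nodup) (hC : pvCycOK g s) (v : Int) :
    pvSOL g cD s v = if v = s then (some 0, 1)
      else (pvPL g v).foldl (pvStep cD (pvSOL g cD s) v) (none, 0) := by
  rw [pvSOL]
  show pvSolF g cD s (g.keys.length + 1) v = _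
  simp only [pvSolF]
  split
  · rfl
  · apply pvFold_congr
    intro u hu
    obtain ⟨huk, hadj⟩ := mem_pvPL.mp hu
    by_cases hre : s ∈ pvBcl g [u]
    · exact pvSolF_eq_SOL hk hC (pvAnc_lt_keys hk (pvCycOK_notanc hC huk hre) huk)
    · rw [pvUnreach_solF hk hre, pvSOL, pvUnreach_solF hk hre]

theorem pvNoFinitePred_s {g : PySem.Dict Int (List Int)} {cD : PySem.Dict (Int × Int) Int} {s u : Int}
    (hk : g.keys.Nodup) (hC : pvCycOK g s)
    (hclo : ∀ a ∈ g.keys, ∀ w ∈ pvAdj g a, w ∈ g.keys)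
    (hu : u ∈ pvPL g s) : (pvSOL g cD s u).1 = none := by
  by_contra hfin
  obtain ⟨huk, hadj⟩ := mem_pvPL.mp hu
  have hsk : s ∈ g.keys := hclo u huk s hadj
  have hsb : s ∈ pvBcl g [u] := pvSolF_finite_bcl hk _ u hfin
  have hsns : s ∉ pvAnc g s :=
    pvCycOK_notanc hC hsk (pvBcl_seed List.mem_cons_self)
  have hsub : pvBcl g [u] ⊆ pvAnc g s := by
    apply pvBcl_mono hk (pvPredsOf_nodup hk s)
    intro x hx
    have hxu : x = u := by simpa using hx
    exact hxu ▸ mem_pvPredsOf.mpr ⟨huk, hadj⟩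
  exact hsns (hsub hsb)

-- the u-segment of the predecessor multiset list
theorem pvPL_filter_seg {g : PySem.Dict Int (List Int)} {u v : Int}
    (hk : g.keys.Nodup) (hu : u ∈ g.keys) :
    (pvPL g v).filter (fun x => x == u) =
      ((pvAdj g u).filter (fun w => w == v)).map (fun _ => u) := by
  rw [pvPL]
  have haux : ∀ l : List Int, l.Nodup →
      (u ∈ l → (l.flatMap (fun a => ((pvAdj g a).filter (fun w => w == v)).map (fun _ => a))).filter (fun x => x == u) = ((pvAdj g u).filter (fun w => w == v)).map (fun _ => u)) ∧
      (u ∉ l → (l.flatMap (fun a => ((pvAdj g a).filter (fun w => w == v)).map (fun _ => a))).filter (fun x => x == u) = []) := by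
    intro l hl
    induction l with
    | nil => exact ⟨fun h => absurd h (List.not_mem_nil), fun _ => rfl⟩
    | cons a l ih =>
        obtain ⟨ha, hl'⟩ := List.nodup_cons.mp hl
        obtain ⟨ih1, ih2⟩ := ih hl'
        have hseg : ∀ b : Int, (((pvAdj g b).filter (fun w => w == v)).map (fun _ => b)).filter (fun x => x == u) = if b = u then ((pvAdj g u).filter (fun w => w == v)).map (fun _ => u) else [] := by
          intro b
          by_cases hb : b = u
          · subst hb
            rw [if_pos rfl, List.filter_map]
            congr 1
            apply List.filter_eq_self.mpr
            intro x _
            simp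
          · rw [if_neg hb, List.filter_map]
            have : ((pvAdj g b).filter (fun w => w == v)).filter ((fun x => x == u) ∘ (fun _ => b)) = [] := by
              apply List.filter_eq_nil_iff.mpr
              intro x _
              simpa using hb
            rw [this, List.map_nil]
        constructor
        · intro hmem
          rcases List.mem_cons.mp hmem with rfl | hmem'
          · simp [List.flatMap_cons, List.filter_append, ih2 ha, hseg u]
            intro a hal _ heq
            exact ha (heq ▸ hal)
          · have hne : a ≠ u := fun h => ha (h ▸ hmem')
            simp only [List.flatMap_cons, List.filter_append, hseg a, if_neg hne, ih1 hmem', List.nil_append]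
        · intro hmem
          have hne : a ≠ u := fun h => hmem (h ▸ List.mem_cons_self)
          have hmem' : u ∉ l := fun h => hmem (List.mem_cons_of_mem _ h)
          simp only [List.flatMap_cons, List.filter_append, hseg a, if_neg hne, ih2 hmem', List.nil_append]
  exact (haux g.keys hk).1 hu

theorem pvFilter_disj_perm {α : Type} (p q : α → Bool) (l : List α)
    (h : ∀ x ∈ l, ¬(p x = true ∧ q x = true)) :
    (l.filter (fun x => p x || q x)).Perm (l.filter p ++ l.filter q) := by
  induction l with
  | nil => simp
  | cons a l ih =>
      have ih' := ih (fun x hx => h x (List.mem_cons_of_mem _ hx))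
      by_cases hp : p a = true
      · have hq : ¬ q a = true := fun hq => h a List.mem_cons_self ⟨hp, hq⟩
        simp only [List.filter_cons, hp, hq, Bool.true_or, if_true]
        simpa using ih'.cons a
      · by_cases hq : q a = true
        · simp only [List.filter_cons, hp, hq, Bool.false_or, if_true, if_false]
          exact (ih'.cons a).trans List.perm_middle.symm
        · simp only [List.filter_cons, hp, hq, Bool.false_or, if_false]
          exact ih'


-- ---------- dict-building characterisations ----------
theorem pvBuild_getD {β : Type} (f : Int → β) (dflt : β) :
    ∀ (ks : List Int) (d0 : PySem.Dict Int β) (x : Int),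
    (ks.foldl (fun d v => d.insert v (f v)) d0).getD x dflt =
      if x ∈ ks then f x else d0.getD x dflt := by
  intro ks
  induction ks with
  | nil => simp
  | cons a ks ih =>
      intro d0 x
      simp only [List.foldl_cons]
      rw [ih]
      by_cases hx : x ∈ ks
      · simp [hx]
      · rw [if_neg hx, PySem.Dict.getD_insert]
        by_cases hxa : x = a <;> simp [hxa, hx]

theorem pvBuild_keys {β : Type} (f : Int → β) (ks : List Int) (hnd : ks.Nodup) :
    (ks.foldl (fun d v => d.insert v (f v)) PySem.Dict.empty).keys = ks := by
  rw [PySem.Dict.keys_foldl_insert]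
  simp only [PySem.Dict.keys_empty, PySem.Set.update_nil_left]
  exact PySem.Set.ofList_eq_self_of_nodup _ hnd

theorem pvPredsInner_getD (g : PySem.Dict Int (List Int)) (u : Int) :
    ∀ (l : List Int) (d : PySem.Dict Int (List Int)) (v : Int),
    (l.foldl (fun d w => d.insert w (d.getD w [] ++ [u])) d).getD v [] =
      d.getD v [] ++ (l.filter (fun w => w == v)).map (fun _ => u) := by
  intro l
  induction l with
  | nil => simp
  | cons w l ih =>
      intro d v
      simp only [List.foldl_cons]
      rw [ih]
      by_cases hwv : w = v
      · subst hwv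
        rw [PySem.Dict.getD_insert, if_pos rfl]
        simp
      · rw [PySem.Dict.getD_insert, if_neg (fun h => hwv h.symm)]
        have : (w == v) = false := by simp [hwv]
        simp [List.filter_cons, this]

theorem pvNilInit_getD (ks : List Int) (x : Int) :
    (ks.foldl (fun d v => d.insert v ([] : List Int)) PySem.Dict.empty).getD x [] = [] := by
  rw [pvBuild_getD (fun _ => ([] : List Int))]
  split <;> simp

theorem pvPreds_getD (g : PySem.Dict Int (List Int)) (v : Int) :
    (pvPreds g).getD v [] = pvPL g v := by
  rw [pvPreds, pvPL]
  have haux : ∀ (l : List Int) (d : PySem.Dict Int (List Int)),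
      (l.foldl (fun d u => (pvAdj g u).foldl (fun d w => d.insert w (d.getD w [] ++ [u])) d) d).getD v [] =
        d.getD v [] ++ l.flatMap (fun u => ((pvAdj g u).filter (fun w => w == v)).map (fun _ => u)) := by
    intro l
    induction l with
    | nil => simp
    | cons u l ih =>
        intro d
        simp only [List.foldl_cons]
        rw [ih, pvPredsInner_getD g u, List.flatMap_cons, List.append_assoc]
  rw [haux, pvNilInit_getD]
  simp

theorem pvZeroInit_getD (ks : List Int) (x : Int) :
    (ks.foldl (fun d u => d.insert u (0 : Int)) PySem.Dict.empty).getD x 0 = 0 := by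
  rw [pvBuild_getD (fun _ => (0 : Int)) 0]
  split <;> simp

theorem pvIndeg_getD (g : PySem.Dict Int (List Int)) (v : Int) :
    ((g.keys.foldl
      (fun d u => (pvAdj g u).foldl (fun d w => d.insert w (d.getD w 0 + 1)) d)
      (g.keys.foldl (fun d u => d.insert u 0) PySem.Dict.empty)).getD v 0)
      = ((pvPL g v).length : Int) := by
  have haux : ∀ (l : List Int) (d : PySem.Dict Int Int),
      (l.foldl (fun d u => (pvAdj g u).foldl (fun d w => d.insert w (d.getD w 0 + 1)) d) d).getD v 0 =
        d.getD v 0 + ((l.flatMap (fun u => ((pvAdj g u).filter (fun w => w == v)).map (fun _ => u))).length : Int) := by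
    intro l
    induction l with
    | nil => simp
    | cons u l ih =>
        intro d
        simp only [List.foldl_cons]
        rw [ih, PySem.Dict.getD_foldl_insert_add_one, List.flatMap_cons, List.length_append]
        push_cast
        have : ((pvAdj g u).count v : Int) = (((pvAdj g u).filter (fun w => w == v)).map (fun _ => u)).length := by
          rw [List.length_map, List.count_eq_countP, List.countP_eq_length_filter]
        omega
  rw [haux, pvZeroInit_getD, pvPL]
  omega

-- ---------- B-side: the rounds compute pvSolF ----------
theorem pvScan_eq_step (cD : PySem.Dict (Int × Int) Int) (st : PySem.Dict Int (Option Int × Int))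
    (v : Int) (bc : Option Int × Int) (u : Int) :
    pvScan cD st v bc u = pvStep cD (fun w => st.getD w (none, 0)) v bc u := by
  rcases h : st.getD u (none, 0) with ⟨_ | du, cu⟩ <;>
    rcases bc with ⟨_ | b, cb⟩ <;>
    simp only [pvScan, pvStep, pvCand, pvMerge, h] <;> (try split_ifs) <;>
    simp_all [Prod.ext_iff] <;> omega

theorem pvRounds_eq (pr : PySem.Dict Int (List Int)) (cD : PySem.Dict (Int × Int) Int) (s : Int) :
    ∀ (k : Nat) (st : PySem.Dict Int (Option Int × Int)),
    pvRounds pr cD s k st = (pvRound pr cD s)^[k] st := by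
  intro k
  induction k with
  | zero => intro st; rfl
  | succ n ih =>
      intro st
      show (if pvRound pr cD s st = st then st else pvRounds pr cD s n (pvRound pr cD s st)) = _
      by_cases h : pvRound pr cD s st = st
      · rw [if_pos h, Function.iterate_succ_apply, h, pvIter_of_fix _ _ h]
      · rw [if_neg h, ih, Function.iterate_succ_apply]


theorem pvSize_eq (g : PySem.Dict Int (List Int)) : g.size = g.keys.length := by
  simp [PySem.Dict.size, PySem.Dict.keys]

theorem pvSt0_keys (g : PySem.Dict Int (List Int)) (hk : g.keys.Nodup) (s : Int) :
    (((g.keys.foldl (fun d v => d.insert v ((none : Option Int), (0 : Int))) PySem.Dict.empty).insert s (some 0, 1))).keys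
      = if s ∈ g.keys then g.keys else g.keys ++ [s] := by
  have hbk : ((g.keys.foldl (fun d v => d.insert v ((none : Option Int), (0 : Int))) PySem.Dict.empty)).keys = g.keys :=
    pvBuild_keys _ _ hk
  by_cases hs : s ∈ g.keys
  · rw [if_pos hs, PySem.Dict.keys_insert_of_contains, hbk]
    rw [PySem.Dict.contains_iff_mem_keys, hbk]
    exact hs
  · rw [if_neg hs, PySem.Dict.keys_insert_of_not_contains, hbk]
    rw [← Bool.not_eq_true, PySem.Dict.contains_iff_mem_keys, hbk]
    exact hs

theorem pvSt0_keys_nodup (g : PySem.Dict Int (List Int)) (hk : g.keys.Nodup) (s : Int) :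
    (((g.keys.foldl (fun d v => d.insert v ((none : Option Int), (0 : Int))) PySem.Dict.empty).insert s (some 0, 1))).keys.Nodup := by
  rw [pvSt0_keys g hk s]
  by_cases hs : s ∈ g.keys
  · rw [if_pos hs]; exact hk
  · rw [if_neg hs]
    refine List.Nodup.append hk (List.nodup_singleton s) ?_
    intro x hx hy
    rw [List.mem_singleton] at hy
    exact hs (hy ▸ hx)

theorem pvSt0_mem_keys (g : PySem.Dict Int (List Int)) (hk : g.keys.Nodup) (s v : Int) :
    v ∈ (((g.keys.foldl (fun d w => d.insert w ((none : Option Int), (0 : Int))) PySem.Dict.empty).insert s (some 0, 1))).keys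
      ↔ v ∈ g.keys ∨ v = s := by
  rw [pvSt0_keys g hk s]
  by_cases hs : s ∈ g.keys
  · rw [if_pos hs]
    constructor
    · exact fun h => Or.inl h
    · rintro (h | rfl)
      · exact h
      · exact hs
  · rw [if_neg hs]
    simp

theorem pvSt0_getD (g : PySem.Dict Int (List Int)) (s v : Int) :
    (((g.keys.foldl (fun d w => d.insert w ((none : Option Int), (0 : Int))) PySem.Dict.empty).insert s (some 0, 1))).getD v ((none : Option Int), (0 : Int))
      = if v = s then ((some 0 : Option Int), (1 : Int)) else ((none : Option Int), (0 : Int)) := by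
  rw [PySem.Dict.getD_insert]
  split
  · rfl
  · rw [pvBuild_getD (fun _ => ((none : Option Int), (0 : Int)))]
    split <;> simp

theorem pvIterRound_keys (g : PySem.Dict Int (List Int)) (cD : PySem.Dict (Int × Int) Int)
    (s : Int) (hk : g.keys.Nodup) :
    ∀ k, ((pvRound (pvPreds g) cD s)^[k]
        ((g.keys.foldl (fun d v => d.insert v ((none : Option Int), (0 : Int))) PySem.Dict.empty).insert s (some 0, 1))).keys
      = (((g.keys.foldl (fun d v => d.insert v ((none : Option Int), (0 : Int))) PySem.Dict.empty).insert s (some 0, 1))).keys := by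
  intro k
  induction k with
  | zero => rfl
  | succ n ih =>
      rw [Function.iterate_succ_apply', pvRound, pvBuild_keys _ _ (ih ▸ pvSt0_keys_nodup g hk s), ih]

theorem pvIterRound_getD (g : PySem.Dict Int (List Int)) (cD : PySem.Dict (Int × Int) Int)
    (s : Int) (hk : g.keys.Nodup)
    (hclo : ∀ u ∈ g.keys, ∀ w ∈ pvAdj g u, w ∈ g.keys) :
    ∀ k v, ((pvRound (pvPreds g) cD s)^[k]
        ((g.keys.foldl (fun d w => d.insert w ((none : Option Int), (0 : Int))) PySem.Dict.empty).insert s (some 0, 1))).getD v ((none : Option Int), (0 : Int))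
      = pvSolF g cD s (k + 1) v := by
  intro k
  induction k with
  | zero =>
      intro v
      rw [Function.iterate_zero_apply, pvSt0_getD]
      show _ = pvSolF g cD s 1 v
      simp only [pvSolF]
      split
      · rfl
      · rw [pvFold_id (fun u _ => rfl)]
  | succ n ih =>
      intro v
      rw [Function.iterate_succ_apply', pvRound, pvBuild_getD]
      rw [pvIterRound_keys g cD s hk n]
      by_cases hv : v ∈ (((g.keys.foldl (fun d w => d.insert w ((none : Option Int), (0 : Int))) PySem.Dict.empty).insert s (some 0, 1))).keys
      · rw [if_pos hv]
        show _ = pvSolF g cD s (n + 2) v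
        simp only [pvSolF]
        by_cases hvs : v = s
        · rw [if_pos hvs, if_pos hvs]
        · rw [if_neg hvs, if_neg hvs, pvPreds_getD]
          have hfn : pvScan cD ((pvRound (pvPreds g) cD s)^[n]
              ((g.keys.foldl (fun d w => d.insert w ((none : Option Int), (0 : Int))) PySem.Dict.empty).insert s (some 0, 1))) v
              = pvStep cD (fun w => ((pvRound (pvPreds g) cD s)^[n]
              ((g.keys.foldl (fun d w => d.insert w ((none : Option Int), (0 : Int))) PySem.Dict.empty).insert s (some 0, 1))).getD w ((none : Option Int), (0 : Int))) v := by
            funext bc u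
            exact pvScan_eq_step _ _ _ _ _
          rw [hfn]
          exact pvFold_congr (fun u _ => ih u) _
      · rw [if_neg hv]
        rw [pvSt0_mem_keys g hk s v] at hv
        push_neg at hv
        show _ = pvSolF g cD s (n + 2) v
        simp only [pvSolF]
        rw [if_neg hv.2, pvPL_nil_of_not_key hclo hv.1, List.foldl_nil]
        simp

theorem pvAltB (graph : List (Int × List Int)) (costs : List (Int × Int × Int)) (s t : Int)
    (hk : (pvG graph).keys.Nodup)
    (hclo : ∀ u ∈ (pvG graph).keys, ∀ w ∈ pvAdj (pvG graph) u, w ∈ (pvG graph).keys) :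
    find_number_of_min_cost_paths_alt graph costs s t =
      (if (pvSOL (pvG graph) (pvC costs) s t).1 ≠ none then (pvSOL (pvG graph) (pvC costs) s t).2 else 0) := by
  show (let g := pvG graph
        let cD := pvC costs
        let pr := pvPreds g
        let st0 := (g.keys.foldl (fun d v => d.insert v ((none : Option Int), (0 : Int))) PySem.Dict.empty).insert s (some 0, 1)
        let fin := pvRounds pr cD s g.size st0
        let bc := fin.getD t ((none : Option Int), (0 : Int))
        if bc.1 ≠ none then bc.2 else 0) = _
  simp only
  rw [pvRounds_eq, pvSize_eq, pvIterRound_getD (pvG graph) (pvC costs) s hk hclo]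
  rfl


-- ---------- Kahn loop correctness ----------
-- remaining (unprocessed) sources of v
def pvRem (g : PySem.Dict Int (List Int)) (topo : List Int) (v : Int) : List Int :=
  (pvPL g v).filter (fun u => decide (u ∉ topo))

theorem pvCountSplit {α : Type} (p q : α → Bool) :
    ∀ l : List α, (l.filter p).length =
      (l.filter (fun x => p x && q x)).length + (l.filter (fun x => p x && !q x)).length := by
  intro l
  induction l with
  | nil => rfl
  | cons a l ih =>
      by_cases hp : p a = true
      · by_cases hq : q a = true <;>
          simp [List.filter_cons, hp, hq, ih] <;> omega
      · simp only [Bool.not_eq_true] at hp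
        simp [List.filter_cons, hp, ih]

theorem pvRem_split {g : PySem.Dict Int (List Int)} {topo : List Int} {u : Int}
    (hk : g.keys.Nodup) (hu : u ∈ g.keys) (hut : u ∉ topo) (v : Int) :
    (pvRem g topo v).length = (pvRem g (topo ++ [u]) v).length + (pvAdj g u).count v := by
  have h1 := pvCountSplit (fun x => decide (x ∉ topo)) (fun x => !(x == u)) (pvPL g v)
  have h2 : (pvPL g v).filter (fun x => decide (x ∉ topo) && !(!(x == u))) =
      (pvPL g v).filter (fun x => x == u) := by
    apply List.filter_congr
    intro x _
    by_cases hxu : x = u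
    · subst hxu
      simp [hut]
    · simp [hxu]
  have h3 : (pvRem g (topo ++ [u]) v) = (pvPL g v).filter (fun x => decide (x ∉ topo) && !(x == u)) := by
    apply List.filter_congr
    intro x _
    by_cases hxu : x = u
    · subst hxu
      simp
    · by_cases hxt : x ∈ topo <;> simp [hxt, hxu]
  have h4 : ((pvPL g v).filter (fun x => x == u)).length = (pvAdj g u).count v := by
    rw [pvPL_filter_seg hk hu, List.length_map, List.count_eq_countP, List.countP_eq_length_filter]
  rw [pvRem, h1, h2, h3, h4]

theorem pvKahnInner {g : PySem.Dict Int (List Int)}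
    (hk : g.keys.Nodup)
    (hclo : ∀ a ∈ g.keys, ∀ w ∈ pvAdj g a, w ∈ g.keys)
    {u : Int} (hu : u ∈ g.keys) {topo' : List Int}
    (hlast : ∀ w ∈ pvAdj g u, w ∉ topo') :
    ∀ (r : List Int) (q1 : List Int) (deg1 : PySem.Dict Int Int),
    (∀ x ∈ r, x ∈ pvAdj g u) →
    q1.Nodup → (∀ x ∈ q1, x ∉ topo') → (∀ x ∈ q1, x ∈ g.keys) →
    (∀ v, deg1.getD v 0 = ((pvRem g topo' v).length : Int) + (r.count v : Int)) →
    (∀ v ∈ g.keys, (pvRem g topo' v).length + r.count v = 0 → v ∈ topo' ∨ v ∈ q1) →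
    (∀ v ∈ q1, ∀ w ∈ pvPL g v, w ∈ topo') →
    (∀ x ∈ q1, r.count x = 0) →
    ((r.foldl pvKahnStep (q1, deg1)).1.Nodup ∧
     (∀ x ∈ (r.foldl pvKahnStep (q1, deg1)).1, x ∉ topo') ∧
     (∀ x ∈ (r.foldl pvKahnStep (q1, deg1)).1, x ∈ g.keys) ∧
     (∀ v, (r.foldl pvKahnStep (q1, deg1)).2.getD v 0 = ((pvRem g topo' v).length : Int)) ∧
     (∀ v ∈ g.keys, (pvRem g topo' v).length = 0 → v ∈ topo' ∨ v ∈ (r.foldl pvKahnStep (q1, deg1)).1) ∧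
     (∀ v ∈ (r.foldl pvKahnStep (q1, deg1)).1, ∀ w ∈ pvPL g v, w ∈ topo')) := by
  intro r
  induction r with
  | nil =>
      intro q1 deg1 _ hJ1 hJ2 hJ3 hJ4 hJ5 hJ6 _
      refine ⟨hJ1, hJ2, hJ3, ?_, ?_, hJ6⟩
      · intro v
        have := hJ4 v
        simpa using this
      · intro v hv hrem
        exact hJ5 v hv (by simpa using hrem)
  | cons v0 r' ih =>
      intro q1 deg1 hr hJ1 hJ2 hJ3 hJ4 hJ5 hJ6 hJ7
      have hv0a : v0 ∈ pvAdj g u := hr v0 List.mem_cons_self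
      have hv0k : v0 ∈ g.keys := hclo u hu v0 hv0a
      have hv0nt : v0 ∉ topo' := hlast v0 hv0a
      simp only [List.foldl_cons]
      -- the step
      have hcnt0 : ∀ x, (v0 :: r').count x = r'.count x + (if x = v0 then 1 else 0) := by
        intro x
        by_cases hx : x = v0
        · subst hx; simp [List.count_cons]
        · simp [List.count_cons, hx, Ne.symm hx]
      set d : Int := deg1.getD v0 0 - 1 with hd
      have hdval : d = ((pvRem g topo' v0).length : Int) + (r'.count v0 : Int) := by
        rw [hd, hJ4 v0, hcnt0 v0, if_pos rfl]
        push_cast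
        omega
      have hstep : pvKahnStep (q1, deg1) v0 =
          ((if d = 0 then q1 ++ [v0] else q1), deg1.insert v0 d) := by
        simp [pvKahnStep, hd]
      rw [hstep]
      have hdeg' : ∀ v, (deg1.insert v0 d).getD v 0 =
          ((pvRem g topo' v).length : Int) + (r'.count v : Int) := by
        intro v
        rw [PySem.Dict.getD_insert]
        by_cases hv : v = v0
        · rw [if_pos hv, hv, hdval]
        · rw [if_neg hv, hJ4 v, hcnt0 v, if_neg hv]
          simp
      by_cases hd0 : d = 0
      · -- v0 is enqueued
        have hboth : (pvRem g topo' v0).length = 0 ∧ r'.count v0 = 0 := by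
          rw [hd0] at hdval
          omega
        have hv0nq : v0 ∉ q1 := by
          intro hmem
          have := hJ7 v0 hmem
          rw [hcnt0 v0, if_pos rfl] at this
          omega
        rw [if_pos hd0]
        apply ih (q1 ++ [v0]) (deg1.insert v0 d)
          (fun x hx => hr x (List.mem_cons_of_mem _ hx))
        · exact List.Nodup.append hJ1 (List.nodup_singleton v0)
            (fun x hx hy => hv0nq ((List.mem_singleton.mp hy) ▸ hx))
        · intro x hx
          rcases List.mem_append.mp hx with hx | hx
          · exact hJ2 x hx
          · exact (List.mem_singleton.mp hx) ▸ hv0nt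
        · intro x hx
          rcases List.mem_append.mp hx with hx | hx
          · exact hJ3 x hx
          · exact (List.mem_singleton.mp hx) ▸ hv0k
        · exact hdeg'
        · intro v hv hrem
          by_cases hvv0 : v = v0
          · exact Or.inr (List.mem_append.mpr (Or.inr (List.mem_singleton.mpr hvv0)))
          · have : (pvRem g topo' v).length + (v0 :: r').count v = 0 := by
              rw [hcnt0 v, if_neg hvv0]
              omega
            rcases hJ5 v hv this with h | h
            · exact Or.inl h
            · exact Or.inr (List.mem_append.mpr (Or.inl h))
        · intro v hv w hw
          rcases List.mem_append.mp hv with hv | hv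
          · exact hJ6 v hv w hw
          · have hvv0 := List.mem_singleton.mp hv
            subst hvv0
            have : pvRem g topo' v = [] := List.eq_nil_of_length_eq_zero hboth.1
            rw [pvRem, List.filter_eq_nil_iff] at this
            have h2 := this w hw
            simpa using h2
        · intro x hx
          rcases List.mem_append.mp hx with hx | hx
          · have := hJ7 x hx
            rw [hcnt0 x] at this
            omega
          · rw [List.mem_singleton.mp hx]
            exact hboth.2
      · -- not enqueued
        rw [if_neg hd0]
        apply ih q1 (deg1.insert v0 d)
          (fun x hx => hr x (List.mem_cons_of_mem _ hx)) hJ1 hJ2 hJ3 hdeg'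
        · intro v hv hrem
          by_cases hvv0 : v = v0
          · exfalso
            apply hd0
            rw [hdval]
            subst hvv0
            push_cast
            omega
          · have : (pvRem g topo' v).length + (v0 :: r').count v = 0 := by
              rw [hcnt0 v, if_neg hvv0]
              omega
            exact hJ5 v hv this
        · exact hJ6
        · intro x hx
          have := hJ7 x hx
          rw [hcnt0 x] at this
          omega

theorem pvKahnLoop_zero (g : PySem.Dict Int (List Int)) (q topo : List Int) (deg : PySem.Dict Int Int) :
    pvKahnLoop g 0 q topo deg = topo := by
  cases q <;> rfl

theorem pvKahnLoop_nil (g : PySem.Dict Int (List Int)) (n : Nat) (topo : List Int) (deg : PySem.Dict Int Int) :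
    pvKahnLoop g (n + 1) [] topo deg = topo := rfl

theorem pvKahnLoop_cons (g : PySem.Dict Int (List Int)) (n : Nat) (u : Int) (q topo : List Int) (deg : PySem.Dict Int Int) :
    pvKahnLoop g (n + 1) (u :: q) topo deg =
      pvKahnLoop g n ((pvAdj g u).foldl pvKahnStep (q, deg)).1 (topo ++ [u]) ((pvAdj g u).foldl pvKahnStep (q, deg)).2 := rfl

-- x and all its ancestors are cycle-free
def pvClean (g : PySem.Dict Int (List Int)) (x : Int) : Prop :=
  x ∉ pvAnc g x ∧ ∀ z ∈ pvAnc g x, z ∉ pvAnc g z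

theorem pvAnc_sub_bclSelf {g : PySem.Dict Int (List Int)} (hk : g.keys.Nodup) (x : Int) :
    pvAnc g x ⊆ pvBcl g [x] := by
  apply pvBcl_minimal (pvBcl_fixed hk (List.nodup_singleton x))
  intro p hp
  obtain ⟨hpk, hadj⟩ := mem_pvPredsOf.mp hp
  exact pvBcl_closed hk (List.nodup_singleton x) hpk hadj (pvBcl_seed List.mem_cons_self)

theorem pvClean_of_reach {g : PySem.Dict Int (List Int)} {s x : Int}
    (hk : g.keys.Nodup) (hC : pvCycOK g s) (hx : x ∈ g.keys) (hre : s ∈ pvBcl g [x]) :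
    pvClean g x := by
  constructor
  · exact pvCycOK_notanc hC hx hre
  · intro z hz hzz
    have hzk : z ∈ g.keys := pvAnc_subset_keys z hz
    exact hC z hzk hzz x hx hre (pvAnc_sub_bclSelf hk x hz)

theorem pvClean_of_pred {g : PySem.Dict Int (List Int)} {x w : Int}
    (hk : g.keys.Nodup) (hcl : pvClean g x) (hw : w ∈ pvPL g x) : pvClean g w := by
  obtain ⟨hwk, hadj⟩ := mem_pvPL.mp hw
  have hwanc : w ∈ pvAnc g x := pvBcl_seed (mem_pvPredsOf.mpr ⟨hwk, hadj⟩)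
  have hsub : pvAnc g w ⊆ pvAnc g x := by
    apply pvBcl_minimal (pvBcl_fixed hk (pvPredsOf_nodup hk x))
    intro p hp
    obtain ⟨hpk, hpadj⟩ := mem_pvPredsOf.mp hp
    exact pvBcl_closed hk (pvPredsOf_nodup hk x) hpk hpadj hwanc
  exact ⟨hcl.2 w hwanc, fun z hz => hcl.2 z (hsub hz)⟩

theorem pvTopoFull_of_len {g : PySem.Dict Int (List Int)} {topo : List Int}
    (hk : g.keys.Nodup) (hnd : topo.Nodup) (hsub : ∀ x ∈ topo, x ∈ g.keys)
    (hlen : g.keys.length ≤ topo.length) : ∀ x ∈ g.keys, x ∈ topo := by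
  have hfs : topo.toFinset ⊆ g.keys.toFinset := by
    intro x hx
    simp only [List.mem_toFinset] at *
    exact hsub x hx
  have hcard : g.keys.toFinset.card ≤ topo.toFinset.card := by
    rw [List.toFinset_card_of_nodup hnd, List.toFinset_card_of_nodup hk]
    exact hlen
  have := Finset.eq_of_subset_of_card_le hfs hcard
  intro x hx
  have : x ∈ topo.toFinset := this ▸ List.mem_toFinset.mpr hx
  exact List.mem_toFinset.mp this

theorem pvKahnLoop_spec {g : PySem.Dict Int (List Int)}
    (hk : g.keys.Nodup)
    (hclo : ∀ a ∈ g.keys, ∀ w ∈ pvAdj g a, w ∈ g.keys) :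
    ∀ (fuel : Nat) (q topo : List Int) (deg : PySem.Dict Int Int),
    g.keys.length ≤ fuel + topo.length →
    q.Nodup → topo.Nodup → (∀ x ∈ q, x ∉ topo) → (∀ x ∈ q, x ∈ g.keys) → (∀ x ∈ topo, x ∈ g.keys) →
    (∀ v, deg.getD v 0 = ((pvRem g topo v).length : Int)) →
    (∀ v ∈ g.keys, (pvRem g topo v).length = 0 → v ∈ topo ∨ v ∈ q) →
    (∀ v ∈ q, ∀ w ∈ pvPL g v, w ∈ topo) →
    (∀ t1 v t2, topo = t1 ++ v :: t2 → ∀ w ∈ pvPL g v, w ∈ t1) →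
    ((∀ x ∈ g.keys, pvClean g x → x ∈ pvKahnLoop g fuel q topo deg) ∧
     (pvKahnLoop g fuel q topo deg).Nodup ∧
     (∀ x ∈ pvKahnLoop g fuel q topo deg, x ∈ g.keys) ∧
     (∀ t1 v t2, pvKahnLoop g fuel q topo deg = t1 ++ v :: t2 → ∀ w ∈ pvPL g v, w ∈ t1)) := by
  intro fuel
  induction fuel with
  | zero =>
      intro q topo deg hfuel h1 h2 h3 h4 h5 _ _ _ h9
      rw [pvKahnLoop_zero]
      refine ⟨?_, h2, h5, h9⟩
      exact fun x hx _ => pvTopoFull_of_len hk h2 h5 (by omega) x hx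
  | succ n ih =>
      intro q topo deg hfuel h1 h2 h3 h4 h5 h6 h7 h8 h9
      cases q with
      | nil =>
          rw [pvKahnLoop_nil]
          have hcompl : ∀ m, ∀ v ∈ g.keys, pvClean g v → (pvAnc g v).length < m → v ∈ topo := by
            intro m
            induction m with
            | zero => intro v _ _ h; omega
            | succ m ihm =>
                intro v hv hcl hm
                by_cases hrem : (pvRem g topo v).length = 0
                · rcases h7 v hv hrem with h | h
                  · exact h
                  · exact absurd h (List.not_mem_nil)
                · exfalso
                  have hne : pvRem g topo v ≠ [] := by
                    intro hnil; rw [hnil] at hrem; exact hrem rfl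
                  rcases List.exists_mem_of_ne_nil _ hne with ⟨w, hw⟩
                  have hw2 := List.of_mem_filter hw
                  have hw1 : w ∈ pvPL g v := List.mem_of_mem_filter hw
                  obtain ⟨hwk, hwv⟩ := mem_pvPL.mp hw1
                  have hclw : pvClean g w := pvClean_of_pred hk hcl hw1
                  have hlt : (pvAnc g w).length < (pvAnc g v).length :=
                    pvAnc_lt hk hclw.1 hwk hwv
                  have : w ∈ topo := ihm w hwk hclw (by omega)
                  simp [this] at hw2
          exact ⟨fun x hx hcl => hcompl ((pvAnc g x).length + 1) x hx hcl (by omega), h2, h5, h9⟩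
      | cons u q' =>
          have hu : u ∈ g.keys := h4 u List.mem_cons_self
          have hunt : u ∉ topo := h3 u List.mem_cons_self
          have huq' : u ∉ q' := (List.nodup_cons.mp h1).1
          have hq'nd : q'.Nodup := (List.nodup_cons.mp h1).2
          -- properties of topo' = topo ++ [u]
          have hsplit : ∀ t1 v t2, topo ++ [u] = t1 ++ v :: t2 →
              ∀ w ∈ pvPL g v, w ∈ t1 := by
            intro t1 v t2 heq
            rcases List.eq_nil_or_concat t2 with rfl | ⟨t2', c, rfl⟩
            · have := List.append_inj' heq rfl
              obtain ⟨ht1, hv⟩ := this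
              have hvu : u = v := by simpa using hv
              subst hvu
              rw [← ht1]
              exact h8 u List.mem_cons_self
            · have heq2 : topo ++ [u] = (t1 ++ v :: t2') ++ [c] := by
                rw [heq]; simp
              have := List.append_inj' heq2 rfl
              obtain ⟨ht, hc⟩ := this
              exact h9 t1 v t2' ht
          have hlast : ∀ w ∈ pvAdj g u, w ∉ topo ++ [u] := by
            intro w hw hmem
            rcases List.mem_append.mp hmem with hmem | hmem
            · rcases List.append_of_mem hmem with ⟨t1, t2, rfl⟩
              have := h9 t1 w t2 rfl u (mem_pvPL.mpr ⟨hu, hw⟩)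
              have : u ∈ t1 ++ w :: t2 := List.mem_append.mpr (Or.inl this)
              exact hunt this
            · have hwu : w = u := List.mem_singleton.mp hmem
              -- u ∈ graph[u] would put u among its own unprocessed sources, but
              -- every source of a queued vertex is already in topo while u is not
              exact hunt (h8 u List.mem_cons_self u (mem_pvPL.mpr ⟨hu, hwu ▸ hw⟩))
          rw [pvKahnLoop_cons]
          have hinner := pvKahnInner hk hclo hu hlast (pvAdj g u) q' deg
            (fun x hx => hx)
            hq'nd
            (by
              intro x hx hmem
              rcases List.mem_append.mp hmem with hm | hm
              · exact h3 x (List.mem_cons_of_mem _ hx) hm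
              · exact huq' ((List.mem_singleton.mp hm) ▸ hx))
            (fun x hx => h4 x (List.mem_cons_of_mem _ hx))
            (by
              intro v
              rw [h6 v, pvRem_split hk hu hunt v]
              push_cast
              ring)
            (by
              intro v hv hrem
              have hrem0 : (pvRem g topo v).length = 0 := by
                rw [pvRem_split hk hu hunt v]
                omega
              rcases h7 v hv hrem0 with h | h
              · exact Or.inl (List.mem_append.mpr (Or.inl h))
              · rcases List.mem_cons.mp h with rfl | h
                · exact Or.inl (List.mem_append.mpr (Or.inr List.mem_cons_self))
                · exact Or.inr h)
            (fun v hv w hw => List.mem_append.mpr (Or.inl (h8 v (List.mem_cons_of_mem _ hv) w hw)))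
            (by
              intro x hx
              by_cases hc : (pvAdj g u).count x = 0
              · exact hc
              · exfalso
                have hxa : x ∈ pvAdj g u := by
                  have := Nat.pos_of_ne_zero hc
                  exact List.count_pos_iff.mp this
                have := h8 x (List.mem_cons_of_mem _ hx) u (mem_pvPL.mpr ⟨hu, hxa⟩)
                exact hunt this)
          obtain ⟨k1, k2, k3, k4, k5, k6⟩ := hinner
          exact ih _ _ _
            (by rw [List.length_append]; simpa using (by omega : g.keys.length ≤ n + (topo.length + 1)))
            k1 (by
              refine List.Nodup.append h2 (List.nodup_singleton u) ?_
              intro x hx hy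
              exact hunt ((List.mem_singleton.mp hy) ▸ hx))
            k2 k3
            (by
              intro x hx
              rcases List.mem_append.mp hx with hx | hx
              · exact h5 x hx
              · exact (List.mem_singleton.mp hx) ▸ hu)
            k4 k5 k6 hsplit

def pvIndegD (g : PySem.Dict Int (List Int)) : PySem.Dict Int Int :=
  g.keys.foldl
    (fun d u => (pvAdj g u).foldl (fun d v => d.insert v (d.getD v 0 + 1)) d)
    (g.keys.foldl (fun d u => d.insert u 0) PySem.Dict.empty)

theorem pvIndegD_getD (g : PySem.Dict Int (List Int)) (v : Int) :
    (pvIndegD g).getD v 0 = ((pvPL g v).length : Int) := pvIndeg_getD g v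

theorem pvTopo_eq (g : PySem.Dict Int (List Int)) :
    pvTopo g = pvKahnLoop g (g.size + 1)
      (g.keys.filter (fun u => (pvIndegD g).getD u 0 = 0)) [] (pvIndegD g) := rfl

theorem pvRem_nil (g : PySem.Dict Int (List Int)) (v : Int) : pvRem g [] v = pvPL g v := by
  rw [pvRem, List.filter_eq_self.mpr]
  intro x _
  simp

theorem pvTopo_spec {g : PySem.Dict Int (List Int)}
    (hk : g.keys.Nodup)
    (hclo : ∀ a ∈ g.keys, ∀ w ∈ pvAdj g a, w ∈ g.keys) :
    (∀ x ∈ g.keys, pvClean g x → x ∈ pvTopo g) ∧ (pvTopo g).Nodup ∧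
    (∀ x ∈ pvTopo g, x ∈ g.keys) ∧
    (∀ t1 v t2, pvTopo g = t1 ++ v :: t2 → ∀ w ∈ pvPL g v, w ∈ t1) := by
  rw [pvTopo_eq]
  apply pvKahnLoop_spec hk hclo
  · rw [pvSize_eq]; omega
  · exact hk.filter _
  · exact List.nodup_nil
  · intro x _; exact List.not_mem_nil
  · intro x hx; exact List.mem_of_mem_filter hx
  · intro x hx; exact absurd hx List.not_mem_nil
  · intro v
    rw [pvIndegD_getD g v, pvRem_nil]
  · intro v hv hrem
    refine Or.inr (List.mem_filter.mpr ⟨hv, ?_⟩)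
    rw [pvRem_nil] at hrem
    simp [pvIndegD_getD g v, hrem]
  · intro v hv w hw
    exfalso
    have := List.of_mem_filter hv
    rw [pvIndegD_getD g v] at this
    have hlen : (pvPL g v).length = 0 := by
      simpa using this
    rw [List.length_eq_zero_iff] at hlen
    rw [hlen] at hw
    exact List.not_mem_nil hw
  · intro t1 v t2 heq
    exact absurd heq (by simp)


-- ---------- A's forward sweep computes pvSOL ----------
def pvEntry (st : PySem.Dict Int (Option Int) × PySem.Dict Int Int) (v : Int) :
    Option Int × Int := (st.1.getD v none, st.2.getD v 0)

def pvIdeal (g : PySem.Dict Int (List Int)) (cD : PySem.Dict (Int × Int) Int) (s : Int)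
    (P : List Int) (v : Int) : Option Int × Int :=
  if v = s then (some 0, 1)
  else ((pvPL g v).filter (fun w => decide (w ∈ P))).foldl (pvStep cD (pvSOL g cD s) v) (none, 0)

def pvMid (g : PySem.Dict Int (List Int)) (cD : PySem.Dict (Int × Int) Int) (s : Int)
    (P : List Int) (u : Int) (c : List Int) (x : Int) : Option Int × Int :=
  if x = s then (some 0, 1)
  else (((pvPL g x).filter (fun w => decide (w ∈ P))) ++ (c.filter (fun w => w == x)).map (fun _ => u)).foldl
    (pvStep cD (pvSOL g cD s) x) (none, 0)

theorem pvSOL_s (g : PySem.Dict Int (List Int)) (cD : PySem.Dict (Int × Int) Int) (s : Int) :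
    pvSOL g cD s s = (some 0, 1) := by
  simp [pvSOL, pvSolF]

theorem pvRelaxA_entry (cD : PySem.Dict (Int × Int) Int) (u : Int)
    (st : PySem.Dict Int (Option Int) × PySem.Dict Int Int) (v : Int) {du cu : Int}
    (hmcu : st.1.getD u none = some du) (hcu : st.2.getD u 0 = cu) (hvu : v ≠ u) (x : Int) :
    pvEntry (pvRelaxA cD u st v) x =
      if x = v then pvMerge (pvEntry st v) (pvCand cD v (some du, cu) u) else pvEntry st x := by
  have hbody : pvRelaxA cD u st v =
      (if pvOptGt (st.1.getD v none) (some (du + cD.getD (u, v) 0))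
       then (st.1.insert v (some (du + cD.getD (u, v) 0)), st.2.insert v (st.2.getD u 0))
       else if st.1.getD v none = some (du + cD.getD (u, v) 0)
       then (st.1, st.2.insert v (st.2.getD v 0 + st.2.getD u 0))
       else st) := by
    unfold pvRelaxA
    rw [hmcu]
  rw [hbody]
  rcases hmcv : st.1.getD v none with _ | b
  · -- min_cost[v] = inf : Python takes the `>` branch
    rw [if_pos (show pvOptGt none (some (du + cD.getD (u, v) 0)) = true from rfl)]
    by_cases hxv : x = v
    · subst hxv
      rw [if_pos rfl]
      simp only [pvEntry]
      rw [PySem.Dict.getD_insert_self, PySem.Dict.getD_insert_self, hmcv, hcu]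
      rfl
    · rw [if_neg hxv]
      simp only [pvEntry]
      rw [PySem.Dict.getD_insert_of_ne _ _ _ hxv, PySem.Dict.getD_insert_of_ne _ _ _ hxv]
  · by_cases hgt : b > du + cD.getD (u, v) 0
    · rw [if_pos (by simpa [pvOptGt] using hgt)]
      by_cases hxv : x = v
      · subst hxv
        rw [if_pos rfl]
        simp only [pvEntry]
        rw [PySem.Dict.getD_insert_self, PySem.Dict.getD_insert_self, hmcv, hcu]
        simp only [pvMerge, pvCand]
        rw [if_neg (by omega), if_pos (by omega)]
      · rw [if_neg hxv]
        simp only [pvEntry]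
        rw [PySem.Dict.getD_insert_of_ne _ _ _ hxv, PySem.Dict.getD_insert_of_ne _ _ _ hxv]
    · rw [if_neg (by simpa [pvOptGt] using hgt)]
      by_cases heq : b = du + cD.getD (u, v) 0
      · rw [if_pos (by rw [heq])]
        by_cases hxv : x = v
        · subst hxv
          rw [if_pos rfl]
          simp only [pvEntry]
          rw [PySem.Dict.getD_insert_self, hmcv, hcu]
          simp only [pvMerge, pvCand]
          rw [if_neg (by omega), if_neg (by omega), heq]
        · rw [if_neg hxv]
          simp only [pvEntry]
          rw [PySem.Dict.getD_insert_of_ne _ _ _ hxv]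
      · rw [if_neg (fun hc => heq (by simpa using hc))]
        by_cases hxv : x = v
        · subst hxv
          rw [if_pos rfl]
          simp only [pvEntry]
          rw [hmcv]
          simp only [pvMerge, pvCand]
          rw [if_pos (by omega)]
        · rw [if_neg hxv]

theorem pvSweepInner (g : PySem.Dict Int (List Int)) (cD : PySem.Dict (Int × Int) Int) (s : Int)
    {u du cu : Int} {P : List Int}
    (hSOLu : pvSOL g cD s u = (some du, cu))
    (hsadj : s ∉ pvAdj g u) (huadj : u ∉ pvAdj g u) :
    ∀ (w c : List Int) (st : PySem.Dict Int (Option Int) × PySem.Dict Int Int),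
    pvAdj g u = c ++ w →
    (∀ x, pvEntry st x = pvMid g cD s P u c x) →
    st.1.getD u none = some du → st.2.getD u 0 = cu →
    (∀ x, pvEntry (w.foldl (pvRelaxA cD u) st) x = pvMid g cD s P u (c ++ w) x) := by
  intro w
  induction w with
  | nil =>
      intro c st _ hinv _ _ x
      rw [List.foldl_nil, List.append_nil]
      exact hinv x
  | cons v0 w' ih =>
      intro c st hsplit hinv hdu hcu x
      have hv0adj : v0 ∈ pvAdj g u := by
        rw [hsplit]
        exact List.mem_append.mpr (Or.inr List.mem_cons_self)
      have hv0u : v0 ≠ u := fun h => huadj (h ▸ hv0adj)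
      have hv0s : v0 ≠ s := fun h => hsadj (h ▸ hv0adj)
      rw [List.foldl_cons]
      have hnext : ∀ y, pvEntry (pvRelaxA cD u st v0) y = pvMid g cD s P u (c ++ [v0]) y := by
        intro y
        rw [pvRelaxA_entry cD u st v0 hdu hcu hv0u y]
        by_cases hyv : y = v0
        · subst hyv
          rw [if_pos rfl, hinv y, pvMid, pvMid, if_neg hv0s, if_neg hv0s]
          rw [List.filter_append, List.filter_cons]
          simp only [beq_self_eq_true, if_true, List.filter_nil, List.map_append, List.map_cons,
            List.map_nil, List.append_nil]
          rw [← List.append_assoc]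
          simp only [List.foldl_append, List.foldl_cons, List.foldl_nil]
          simp only [pvStep, hSOLu]
        · rw [if_neg hyv, hinv y, pvMid, pvMid]
          by_cases hys : y = s
          · rw [if_pos hys, if_pos hys]
          · rw [if_neg hys, if_neg hys]
            congr 2
            rw [List.filter_append, List.filter_cons]
            have : (v0 == y) = false := by
              simp
              exact fun h => hyv h.symm
            rw [this]
            simp
      have hdu' : (pvRelaxA cD u st v0).1.getD u none = some du := by
        have h2 := pvRelaxA_entry cD u st v0 hdu hcu hv0u u
        rw [if_neg (fun h => hv0u h.symm)] at h2
        have h3 : (pvRelaxA cD u st v0).1.getD u none = (pvEntry (pvRelaxA cD u st v0) u).1 := rfl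
        rw [h3, h2]
        exact congrArg Prod.fst (show pvEntry st u = (some du, cu) by rw [pvEntry, hdu, hcu])
      have hcu' : (pvRelaxA cD u st v0).2.getD u 0 = cu := by
        have h2 := pvRelaxA_entry cD u st v0 hdu hcu hv0u u
        rw [if_neg (fun h => hv0u h.symm)] at h2
        have h3 : (pvRelaxA cD u st v0).2.getD u 0 = (pvEntry (pvRelaxA cD u st v0) u).2 := rfl
        rw [h3, h2]
        exact congrArg Prod.snd (show pvEntry st u = (some du, cu) by rw [pvEntry, hdu, hcu])
      have hrec := ih (c ++ [v0]) (pvRelaxA cD u st v0) (by rw [hsplit]; simp) hnext hdu' hcu'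
      rw [show c ++ v0 :: w' = (c ++ [v0]) ++ w' by simp]
      exact hrec x

theorem pvIdeal_perm_step (g : PySem.Dict Int (List Int)) (cD : PySem.Dict (Int × Int) Int)
    (s u : Int) (P : List Int) (hk : g.keys.Nodup) (hu : u ∈ g.keys) (hPu : u ∉ P) (v : Int) :
    ((pvPL g v).filter (fun w => decide (w ∈ P ++ [u]))).foldl (pvStep cD (pvSOL g cD s) v) (none, 0) =
    (((pvPL g v).filter (fun w => decide (w ∈ P))) ++ ((pvAdj g u).filter (fun w => w == v)).map (fun _ => u)).foldl
      (pvStep cD (pvSOL g cD s) v) (none, 0) := by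
  have hp : (pvPL g v).filter (fun w => decide (w ∈ P ++ [u])) =
      (pvPL g v).filter (fun w => decide (w ∈ P) || (w == u)) := by
    apply List.filter_congr
    intro w _
    by_cases h1 : w ∈ P <;> by_cases h2 : w = u <;> simp [h1, h2]
  have hperm := pvFilter_disj_perm (fun w => decide (w ∈ P)) (fun w => w == u) (pvPL g v)
    (by
      intro w _ hcon
      obtain ⟨hwP, hwu⟩ := hcon
      rw [decide_eq_true_eq] at hwP
      rw [beq_iff_eq] at hwu
      exact hPu (hwu ▸ hwP))
  rw [hp, pvFold_perm cD (pvSOL g cD s) v hperm]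
  rw [pvPL_filter_seg hk hu]

theorem pvSweep (g : PySem.Dict Int (List Int)) (cD : PySem.Dict (Int × Int) Int) (s : Int)
    (hk : g.keys.Nodup)
    (hclo : ∀ a ∈ g.keys, ∀ w ∈ pvAdj g a, w ∈ g.keys)
    (hC : pvCycOK g s) :
    ∀ (rest P : List Int) (st : PySem.Dict Int (Option Int) × PySem.Dict Int Int),
    (∀ t1 v t2, P ++ rest = t1 ++ v :: t2 → ∀ w ∈ pvPL g v, w ∈ t1) →
    (P ++ rest).Nodup →
    (∀ x ∈ rest, x ∈ g.keys) →
    (∀ v, pvEntry st v = pvIdeal g cD s P v) →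
    ∀ v, pvEntry (rest.foldl
        (fun st u => if st.1.getD u none ≠ none then (pvAdj g u).foldl (pvRelaxA cD u) st else st) st) v
      = pvIdeal g cD s (P ++ rest) v := by
  intro rest
  induction rest with
  | nil =>
      intro P st _ _ _ hinv v
      rw [List.foldl_nil, List.append_nil]
      exact hinv v
  | cons u rest' ih =>
      intro P st hT9 hnd hrk hinv
      have hu : u ∈ g.keys := hrk u List.mem_cons_self
      have hPu : u ∉ P := fun hmem =>
        (List.disjoint_of_nodup_append hnd) hmem List.mem_cons_self
      have hPLu : ∀ w ∈ pvPL g u, w ∈ P := hT9 P u rest' rfl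
      have hfull : (pvPL g u).filter (fun w => decide (w ∈ P)) = pvPL g u := by
        apply List.filter_eq_self.mpr
        intro w hw
        simpa using hPLu w hw
      have hEu : pvEntry st u = pvSOL g cD s u := by
        rw [hinv u, pvIdeal]
        by_cases hus : u = s
        · rw [if_pos hus, hus, pvSOL_s]
        · rw [if_neg hus, hfull, pvSOL_unfold hk hC u, if_neg hus]
      intro vf
      simp only [List.foldl_cons]
      by_cases hfin : (pvSOL g cD s u).1 = none
      · -- unreachable u: the guard fails, nothing changes
        have hguard : st.1.getD u none = none := by
          have : (pvEntry st u).1 = none := by rw [hEu]; exact hfin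
          exact this
        rw [if_neg (by rw [hguard]; simp)]
        have hinv' : ∀ v, pvEntry st v = pvIdeal g cD s (P ++ [u]) v := by
          intro v
          rw [hinv v, pvIdeal, pvIdeal]
          by_cases hvs : v = s
          · rw [if_pos hvs, if_pos hvs]
          · rw [if_neg hvs, if_neg hvs]
            rw [pvIdeal_perm_step g cD s u P hk hu hPu v, List.foldl_append,
              pvFold_id (l := ((pvAdj g u).filter (fun w => w == v)).map (fun _ => u)) (by
                intro w hw
                obtain ⟨a, _, rfl⟩ := List.mem_map.mp hw
                rcases hS : pvSOL g cD s u with ⟨o, cc⟩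
                rw [hS] at hfin
                simp only at hfin
                subst hfin
                rfl)]
        have := ih (P ++ [u]) st
          (by
            intro t1 v t2 heq w hw
            apply hT9 t1 v t2 _ w hw
            rw [← heq]; simp)
          (by rw [List.append_assoc]; simpa using hnd)
          (fun x hx => hrk x (List.mem_cons_of_mem _ hx))
          hinv'
        rw [show P ++ u :: rest' = (P ++ [u]) ++ rest' by simp]
        exact this vf
      · rcases hS : pvSOL g cD s u with ⟨_ | du, cu⟩
        · rw [hS] at hfin; simp at hfin
        have hguard : st.1.getD u none = some du := by
          have : (pvEntry st u).1 = some du := by rw [hEu, hS]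
          exact this
        have hcuv : st.2.getD u 0 = cu := by
          have : (pvEntry st u).2 = cu := by rw [hEu, hS]
          exact this
        rw [if_pos (by rw [hguard]; simp)]
        have hsadj : s ∉ pvAdj g u := by
          intro hmem
          have := pvNoFinitePred_s (cD := cD) hk hC hclo (mem_pvPL.mpr ⟨hu, hmem⟩)
          rw [hS] at this
          simp at this
        have huadj : u ∉ pvAdj g u := by
          intro hmem
          exact hPu (hPLu u (mem_pvPL.mpr ⟨hu, hmem⟩))
        have hmid0 : ∀ x, pvEntry st x = pvMid g cD s P u [] x := by
          intro x
          rw [hinv x, pvIdeal, pvMid]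
          simp
        have hinner := pvSweepInner g cD s hS hsadj huadj (pvAdj g u) [] st (by simp) hmid0 hguard hcuv
        have hinv' : ∀ v, pvEntry ((pvAdj g u).foldl (pvRelaxA cD u) st) v = pvIdeal g cD s (P ++ [u]) v := by
          intro v
          rw [hinner v, pvMid, pvIdeal]
          by_cases hvs : v = s
          · rw [if_pos hvs, if_pos hvs]
          · rw [if_neg hvs, if_neg hvs]
            rw [pvIdeal_perm_step g cD s u P hk hu hPu v]
            simp
        have := ih (P ++ [u]) ((pvAdj g u).foldl (pvRelaxA cD u) st)
          (by
            intro t1 v t2 heq w hw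
            apply hT9 t1 v t2 _ w hw
            rw [← heq]; simp)
          (by rw [List.append_assoc]; simpa using hnd)
          (fun x hx => hrk x (List.mem_cons_of_mem _ hx))
          hinv'
        rw [show P ++ u :: rest' = (P ++ [u]) ++ rest' by simp]
        exact this vf

theorem pvAValue (graph : List (Int × List Int)) (costs : List (Int × Int × Int)) (s t : Int)
    (hk : (pvG graph).keys.Nodup)
    (hclo : ∀ a ∈ (pvG graph).keys, ∀ w ∈ pvAdj (pvG graph) a, w ∈ (pvG graph).keys)
    (hC : pvCycOK (pvG graph) s) :
    find_number_of_min_cost_paths graph costs s t =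
      (if (pvSOL (pvG graph) (pvC costs) s t).1 ≠ none then (pvSOL (pvG graph) (pvC costs) s t).2 else 0) := by
  obtain ⟨hc1, hc2, hc3, hc4⟩ := pvTopo_spec hk hclo
  have hinv0 : ∀ v, pvEntry
      (((pvG graph).keys.foldl (fun d u => d.insert u (none : Option Int)) PySem.Dict.empty).insert s (some 0),
       ((pvG graph).keys.foldl (fun d u => d.insert u (0 : Int)) PySem.Dict.empty).insert s 1) v
      = pvIdeal (pvG graph) (pvC costs) s [] v := by
    intro v
    rw [pvEntry, pvIdeal]
    by_cases hvs : v = s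
    · subst hvs
      simp [PySem.Dict.getD_insert_self]
    · rw [if_neg hvs]
      rw [PySem.Dict.getD_insert_of_ne _ _ _ hvs, PySem.Dict.getD_insert_of_ne _ _ _ hvs]
      rw [pvBuild_getD (fun _ => (none : Option Int)), pvBuild_getD (fun _ => (0 : Int))]
      rw [show (pvPL (pvG graph) v).filter (fun w => decide (w ∈ ([] : List Int))) = [] by
            apply List.filter_eq_nil_iff.mpr; intro a _; simp]
      rw [List.foldl_nil]
      split <;> simp
  have hsweep := pvSweep (pvG graph) (pvC costs) s hk hclo hC (pvTopo (pvG graph)) [] _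
    (by simpa using hc4)
    (by simpa using hc2)
    hc3
    hinv0
  have hfin := hsweep t
  rw [List.nil_append] at hfin
  have hideal : pvIdeal (pvG graph) (pvC costs) s (pvTopo (pvG graph)) t = pvSOL (pvG graph) (pvC costs) s t := by
    rw [pvIdeal]
    by_cases hts : t = s
    · rw [if_pos hts, hts, pvSOL_s]
    · rw [if_neg hts]
      -- sources of t outside the (possibly partial) topo order are unreachable from s
      -- and contribute the neutral element, so the filtered fold equals the full fold
      have hperm := pvFilter_disj_perm
        (fun w => decide (w ∈ pvTopo (pvG graph))) (fun w => decide (w ∉ pvTopo (pvG graph)))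
        (pvPL (pvG graph) t)
        (by
          intro w _ hcon
          obtain ⟨hw1, hw2⟩ := hcon
          rw [decide_eq_true_eq] at hw1 hw2
          exact hw2 hw1)
      have hfull : (pvPL (pvG graph) t).filter
          (fun w => decide (w ∈ pvTopo (pvG graph)) || decide (w ∉ pvTopo (pvG graph))) = pvPL (pvG graph) t := by
        apply List.filter_eq_self.mpr
        intro w _
        by_cases hw : w ∈ pvTopo (pvG graph) <;> simp [hw]
      have hfold : (pvPL (pvG graph) t).foldl
            (pvStep (pvC costs) (pvSOL (pvG graph) (pvC costs) s) t) (none, 0) =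
          ((pvPL (pvG graph) t).filter (fun w => decide (w ∈ pvTopo (pvG graph)))).foldl
            (pvStep (pvC costs) (pvSOL (pvG graph) (pvC costs) s) t) (none, 0) := by
        conv_lhs => rw [← hfull]
        rw [pvFold_perm (pvC costs) (pvSOL (pvG graph) (pvC costs) s) t hperm,
          List.foldl_append,
          pvFold_id (l := (pvPL (pvG graph) t).filter (fun w => decide (w ∉ pvTopo (pvG graph)))) (by
          intro w hw
          have hwPL : w ∈ pvPL (pvG graph) t := List.mem_of_mem_filter hw
          have hwnt : w ∉ pvTopo (pvG graph) := by
            have := List.of_mem_filter hw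
            simpa using this
          obtain ⟨hwk, _⟩ := mem_pvPL.mp hwPL
          by_cases hfin : (pvSOL (pvG graph) (pvC costs) s w).1 = none
          · rcases hv : pvSOL (pvG graph) (pvC costs) s w with ⟨o, c⟩
            rw [hv] at hfin
            simp only at hfin
            subst hfin
            rfl
          · exfalso
            have hre : s ∈ pvBcl (pvG graph) [w] := pvSolF_finite_bcl hk _ w hfin
            exact hwnt (hc1 w hwk (pvClean_of_reach hk hC hwk hre)))]
      rw [pvSOL_unfold hk hC t, if_neg hts, hfold]
  show (let g := pvG graph
        let cD := pvC costs
        let mc0 := (g.keys.foldl (fun d u => d.insert u (none : Option Int)) PySem.Dict.empty).insert s (some 0)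
        let cnt0 := (g.keys.foldl (fun d u => d.insert u (0 : Int)) PySem.Dict.empty).insert s 1
        let fin := (pvTopo g).foldl
          (fun st u => if st.1.getD u none ≠ none then (pvAdj g u).foldl (pvRelaxA cD u) st else st)
          (mc0, cnt0)
        if fin.1.getD t none ≠ none then fin.2.getD t 0 else 0) = _
  simp only
  rw [show ∀ (st : PySem.Dict Int (Option Int) × PySem.Dict Int Int),
        (if st.1.getD t none ≠ none then st.2.getD t 0 else 0) =
        (if (pvEntry st t).1 ≠ none then (pvEntry st t).2 else 0) from fun st => rfl]
  rw [hfin, hideal]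

-- ===== VERDICT (by name: the statement is the Claim_ definition above) =====
theorem find_number_of_min_cost_paths_spec : Claim_equal_find_number_of_min_cost_paths := by
  intro graph costs s t _hdom hpre
  obtain ⟨hclo, _ht, hC, _hcost⟩ := hpre
  have hk : (pvG graph).keys.Nodup := PySem.Dict.nodup_keys_ofList _
  unfold Spec_find_number_of_min_cost_paths
  rw [pvAValue graph costs s t hk hclo hC, pvAltB graph costs s t hk hclo]
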